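-- pv_equiv track=rewrite | github.com/manas-17045/LeetcodeSolutions | Leetcode 3701-3800/3786/3786.py | interactionCost
-- ===== SOURCE A (Python) =====
-- def interactionCost(n: int, edges: list[list[int]], group: list[int]) -> int:
--     """
--     Calculates the total sum of interaction costs in tree groups.
--
--     Args:
--         n: The number of nodes in the tree.
--         edges: A list of lists representing the edges of the tree.
--         group: A list where group[i] is the group ID of node i.
--
--     Returns:
--         The total sum of interaction costs.
--     """
--
--     if n == 1:
--         return 0
--
--     adjacencyList = [[] for _ in range(n)]
--     for u, v in edges:
--         adjacencyList[u].append(v)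
--         adjacencyList[v].append(u)
--
--     groupCounts = [0] * 21
--     for g in group:
--         groupCounts[g] += 1
--
--     parent = [-1] * n
--     order = []
--     stack = [0]
--
--     while stack:
--         u = stack.pop()
--         order.append(u)
--         for v in adjacencyList[u]:
--             if v != parent[u]:
--                 parent[v] = u
--                 stack.append(v)
--
--     subtreeCounts = [[0] * 21 for _ in range(n)]
--     totalInteractionCost = 0
--
--     for i in range(n - 1, -1, -1):
--         u = order[i]
--         currentGroup = group[u]
--         subtreeCounts[u][currentGroup] += 1
--
--         for v in adjacencyList[u]:
--             if v == parent[u]: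
--                 continue
--
--             for groupIndex in range(1, 21):
--                 countInSubtree = subtreeCounts[v][groupIndex]
--                 if countInSubtree > 0:
--                     countOutside = groupCounts[groupIndex] - countInSubtree
--                     totalInteractionCost += countInSubtree * countOutside
--                     subtreeCounts[u][groupIndex] += countInSubtree
--
--     return totalInteractionCost
-- ===== SOURCE B (Python) =====
-- def interactionCost(n: int, edges: list[list[int]], group: list[int]) -> int:
--     if n == 1:
--         return 0
--
--     groupCounts = [0] * 21
--     for g in group:
--         groupCounts[g] += 1
--
--     # Parent array by edge relaxation: n rounds over the raw edge list, adopting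
--     # a node once its neighbour on the root side is already attached.  No
--     # adjacency list and no traversal order are ever built.
--     parent = [-1] * n
--     assigned = [False] * n
--     assigned[0] = True
--     for _ in range(n):
--         for u, v in edges:
--             if assigned[u] and not assigned[v]:
--                 parent[v] = u
--                 assigned[v] = True
--             elif assigned[v] and not assigned[u]:
--                 parent[u] = v
--                 assigned[u] = True
--
--     # Subtree group counts by charging each node to every proper ancestor along
--     # its parent chain (no child-merge pass).
--     counts = [[0] * 21 for _ in range(n)]
--     for w in range(n):
--         v = w
--         while v != 0:
--             counts[v][group[w]] += 1
--             v = parent[v]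
--
--     total = 0
--     for v in range(1, n):
--         row = counts[v]
--         for g in range(1, 21):
--             s = row[g]
--             if s > 0:
--                 total += s * (groupCounts[g] - s)
--     return total
-- ===== Notes on version B (the rewrite author's own statement) =====
-- stated objective: alternative
-- what changed: Drops A's adjacency list, DFS stack, visiting order and reverse child-merge pass entirely: B computes the parent array by repeated relaxation rounds over the raw edge list, obtains each edge's subtree group counts by charging every node to all its proper ancestors along the parent chain, and then sums s*(total-s) directly per node and group.
-- outside the precondition, e.g. on interactionCost(2, [[0, 1], [0, 1]], [1, 1]): A returns 2, B returns 1; on interactionCost(2, [[0, 1]], [-1, 20]): A returns 1, B returns 1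
import Mathlib
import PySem

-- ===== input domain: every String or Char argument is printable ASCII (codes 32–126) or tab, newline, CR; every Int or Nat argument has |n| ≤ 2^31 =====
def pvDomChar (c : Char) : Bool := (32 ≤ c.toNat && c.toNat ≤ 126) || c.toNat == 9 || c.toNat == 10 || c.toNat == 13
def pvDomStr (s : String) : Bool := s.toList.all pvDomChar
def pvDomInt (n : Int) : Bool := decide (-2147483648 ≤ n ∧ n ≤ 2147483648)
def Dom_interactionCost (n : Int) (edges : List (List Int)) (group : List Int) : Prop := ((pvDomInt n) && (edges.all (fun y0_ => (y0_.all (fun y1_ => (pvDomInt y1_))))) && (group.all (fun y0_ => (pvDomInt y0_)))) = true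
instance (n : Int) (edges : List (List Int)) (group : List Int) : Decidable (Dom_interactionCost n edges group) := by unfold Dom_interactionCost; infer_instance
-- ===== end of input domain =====

-- B drops A's adjacency list, DFS stack, visiting order and reverse child-merge pass: it finds
-- parents by edge-relaxation rounds over the raw edge list, charges each node to all its proper
-- ancestors along the parent chain, and sums s*(total-s) per node and group (alternative
-- algorithm, not faster).

-- ===== PORT A =====
-- Python list reads/writes are ported with PySem.List.pyGetD / pySetD (exact where the index is
-- in range; Python raises on an out-of-range index — those inputs are outside Pre_).
-- The Python stack (append/pop at the right end) is represented top-at-head: an append becomes a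
-- cons, pop() takes the head; the `while stack:` loop runs with fuel n+1, enough for the exactly
-- n iterations it performs on the trees Pre_ admits.
def dfsLoopA (adj : List (List Int)) : Nat → (List Int × List Int × List Int) → (List Int × List Int × List Int)
  | 0, st => st
  | fuel+1, (stack, par, order) =>
    match stack with
    | [] => ([], par, order)
    | u :: rest =>
      let st2 := (PySem.List.pyGetD adj u []).foldl
        (fun (s : List Int × List Int) v =>
          if v ≠ PySem.List.pyGetD s.2 u (-1) then (v :: s.1, PySem.List.pySetD s.2 v u) else s)
        (rest, par)
      dfsLoopA adj fuel (st2.1, st2.2, order ++ [u])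

def interactionCost (n : Int) (edges : List (List Int)) (group : List Int) : Int :=
  if n = 1 then 0 else
  let adj := edges.foldl (fun a e =>
      let u := PySem.List.pyGetD e 0 0
      let v := PySem.List.pyGetD e 1 0
      let a1 := PySem.List.pySetD a u (PySem.List.pyGetD a u [] ++ [v])
      PySem.List.pySetD a1 v (PySem.List.pyGetD a1 v [] ++ [u]))
    (List.replicate n.toNat ([] : List Int))
  let gc := group.foldl (fun g x => PySem.List.pySetD g x (PySem.List.pyGetD g x 0 + 1))
    (List.replicate 21 (0 : Int))
  let st := dfsLoopA adj (n.toNat + 1) ([0], List.replicate n.toNat (-1 : Int), [])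
  let par := st.2.1
  let order := st.2.2
  let res := (PySem.List.pyRange (n-1) (-1) (-1)).foldl (fun (s : List (List Int) × Int) i =>
      let u := PySem.List.pyGetD order i 0
      let cg := PySem.List.pyGetD group u 0
      let sc := PySem.List.pySetD s.1 u (PySem.List.pySetD (PySem.List.pyGetD s.1 u []) cg
                  (PySem.List.pyGetD (PySem.List.pyGetD s.1 u []) cg 0 + 1))
      (PySem.List.pyGetD adj u []).foldl (fun (s2 : List (List Int) × Int) v =>
        if v = PySem.List.pyGetD par u (-1) then s2
        else (PySem.List.pyRange 1 21 1).foldl (fun (s3 : List (List Int) × Int) g =>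
            let cnt := PySem.List.pyGetD (PySem.List.pyGetD s3.1 v []) g 0
            if cnt > 0 then
              (PySem.List.pySetD s3.1 u (PySem.List.pySetD (PySem.List.pyGetD s3.1 u []) g
                 (PySem.List.pyGetD (PySem.List.pyGetD s3.1 u []) g 0 + cnt)),
               s3.2 + cnt * (PySem.List.pyGetD gc g 0 - cnt))
            else s3) s2)
        (sc, s.2))
    (List.replicate n.toNat (List.replicate 21 (0 : Int)), 0)
  res.2

-- ===== PORT B =====
-- One edge-relaxation step: adopt the unassigned endpoint if the other one is assigned
-- (the state is the pair (assigned, parent), two arrays as in Source B).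
def relaxEdgeB (st : List Bool × List Int) (e : List Int) : List Bool × List Int :=
  let u := PySem.List.pyGetD e 0 0
  let v := PySem.List.pyGetD e 1 0
  if PySem.List.pyGetD st.1 u false && !(PySem.List.pyGetD st.1 v false) then
    (PySem.List.pySetD st.1 v true, PySem.List.pySetD st.2 v u)
  else if PySem.List.pyGetD st.1 v false && !(PySem.List.pyGetD st.1 u false) then
    (PySem.List.pySetD st.1 u true, PySem.List.pySetD st.2 u v)
  else st

-- The `while v != 0:` climb of Source B, with fuel n+1: on the trees Pre_ admits a parent chain
-- reaches the root in at most n steps, so the fuel is never exhausted there.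
def climbB (par : List Int) (g : Int) : Nat → Int → List (List Int) → List (List Int)
  | 0, _, M => M
  | f+1, v, M =>
    if v ≠ 0 then
      climbB par g f (PySem.List.pyGetD par v 0)
        (PySem.List.pySetD M v (PySem.List.pySetD (PySem.List.pyGetD M v []) g
          (PySem.List.pyGetD (PySem.List.pyGetD M v []) g 0 + 1)))
    else M

def interactionCost_alt (n : Int) (edges : List (List Int)) (group : List Int) : Int :=
  if n = 1 then 0 else
  let gc := group.foldl (fun g x => PySem.List.pySetD g x (PySem.List.pyGetD g x 0 + 1))
    (List.replicate 21 (0 : Int))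
  let st := (PySem.List.pyRange 0 n 1).foldl (fun st _ => edges.foldl relaxEdgeB st)
    (PySem.List.pySetD (List.replicate n.toNat false) 0 true, List.replicate n.toNat (-1 : Int))
  let par := st.2
  let counts := (PySem.List.pyRange 0 n 1).foldl
    (fun M w => climbB par (PySem.List.pyGetD group w 0) (n.toNat + 1) w M)
    (List.replicate n.toNat (List.replicate 21 (0 : Int)))
  (PySem.List.pyRange 1 n 1).foldl (fun t v =>
    let row := PySem.List.pyGetD counts v []
    (PySem.List.pyRange 1 21 1).foldl (fun t g =>
      let s := PySem.List.pyGetD row g 0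
      if s > 0 then t + s * (PySem.List.pyGetD gc g 0 - s) else t) t) 0

-- ===== PRECONDITION & SPEC =====
-- Tree recognition by leaf elimination: repeatedly delete the smallest nonroot node of degree 1
-- together with its edge.  On a tree rooted at 0 this produces, for every nonroot node v (children
-- before parents), the pair (v, parent of v) and the original edge it came from.
def pvDeg (E : List (Int × Int)) (v : Int) : Nat := (E.map Prod.fst).count v + (E.map Prod.snd).count v

def pvPrune (n : Int) : Nat → List (Int × Int) → Option (List (Int × Int × Int × Int))
  | 0, E => if E.isEmpty then some [] else none
  | fuel+1, E =>
    if E.isEmpty then some [] else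
    match (PySem.List.pyRange 1 n 1).find? (fun v => pvDeg E v == 1) with
    | none => none
    | some v =>
      match E.find? (fun e => e.1 == v || e.2 == v) with
      | none => none
      | some e =>
        (pvPrune n fuel (E.eraseP (fun e => e.1 == v || e.2 == v))).map
          (fun s => (v, (if e.1 = v then e.2 else e.1), e.1, e.2) :: s)

def pvEdgePairs (edges : List (List Int)) : List (Int × Int) :=
  edges.map (fun e => (e.getD 0 0, e.getD 1 0))

-- Checked facts about the elimination sequence (each entry is (v, parent v, original edge)):
-- removal order covers [1,n) without repetition, every parent is 0 or removed later, every entry's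
-- edge joins v to its parent, and the entries' edges are exactly the input edges.
def pvCertOK (n : Int) (edges : List (List Int)) (seq : List (Int × Int × Int × Int)) : Bool :=
  let fsts := seq.map (·.1)
  fsts.Nodup &&
  (PySem.List.pyRange 1 n 1).all (fun v => fsts.contains v) &&
  fsts.all (fun v => 1 ≤ v && v < n) &&
  (List.range seq.length).all (fun k =>
     match seq[k]? with
     | some (v, p, a, b) =>
        (0 ≤ p && p < n) && (p != v) &&
        (p == 0 || (fsts.drop (k+1)).contains p) &&
        ((a == v && b == p) || (a == p && b == v))
     | none => true) &&
  decide ((Multiset.ofList (pvEdgePairs edges)) = Multiset.ofList (seq.map (fun t => (t.2.2.1, t.2.2.2))))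

-- Pre_ is the function's natural domain: a tree on nodes 0..n-1 with group ids in 0..20 (the
-- problem's 1..20 plus the harmless 0), group naming at least the n nodes.  Outside it A raises
-- (disconnected graph, malformed edge, group id < -21 or > 20, group shorter than n), loops
-- forever (a cycle through node 0's component), or — on multigraphs and on group ids in -21..-1,
-- via Python's negative-index wraparound — returns an accidental value outside the tree domain.
def Pre_interactionCost (n : Int) (edges : List (List Int)) (group : List Int) : Prop :=
  n = 1 ∨
  (2 ≤ n
   ∧ (∀ e ∈ edges, e.length = 2 ∧ 0 ≤ e.getD 0 0 ∧ e.getD 0 0 < n ∧ 0 ≤ e.getD 1 0 ∧ e.getD 1 0 < n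
        ∧ e.getD 0 0 ≠ e.getD 1 0)
   ∧ n ≤ (group.length : Int)
   ∧ (∀ g ∈ group, 0 ≤ g ∧ g ≤ 20)
   ∧ (pvPrune n n.toNat (pvEdgePairs edges)).any (fun s => pvCertOK n edges s) = true)

instance (n : Int) (edges : List (List Int)) (group : List Int) : Decidable (Pre_interactionCost n edges group) := by
  unfold Pre_interactionCost; infer_instance

def pvWitness_interactionCost : Int × List (List Int) × List Int := (3, [[0, 1], [1, 2]], [1, 1, 2])

def Spec_interactionCost (n : Int) (edges : List (List Int)) (group : List Int) (out : Int) : Prop :=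
  out = interactionCost_alt n edges group
instance (n : Int) (edges : List (List Int)) (group : List Int) (out : Int) : Decidable (Spec_interactionCost n edges group out) := by
  unfold Spec_interactionCost; infer_instance

-- ===== CLAIM (what is proved, stated in full; the proofs are below) =====
def Claim_equal_interactionCost : Prop := ∀ (n : Int) (edges : List (List Int)) (group : List Int), Dom_interactionCost n edges group → Pre_interactionCost n edges group → Spec_interactionCost n edges group (interactionCost n edges group)

-- ===== LEMMAS AND PROOFS =====

-- ---- array helpers (Int indices, in-range) ----

theorem pv_getD_setD {α : Type} (xs : List α) (i j : Int) (x : α) (d : α)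
    (hi : 0 ≤ i) (hj : 0 ≤ j) :
    PySem.List.pyGetD (PySem.List.pySetD xs i x) j d
      = if j = i ∧ i < (xs.length : Int) then x else PySem.List.pyGetD xs j d := by
  rw [PySem.List.pySetD_of_nonneg xs x hi]
  unfold PySem.List.pyGetD
  rw [PySem.List.pyGet?_of_nonneg _ hj, PySem.List.pyGet?_of_nonneg _ hj]
  by_cases hji : j = i
  · subst hji
    by_cases hlt : j < (xs.length : Int)
    · rw [if_pos ⟨rfl, hlt⟩, List.getElem?_set_self (by omega)]; rfl
    · rw [if_neg (by tauto), List.set_eq_of_length_le (by omega)]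
  · rw [if_neg (by tauto), List.getElem?_set_ne (by omega)]

theorem pv_getD_replicate {α : Type} (k : Nat) (c : α) (j : Int) (d : α) (hj : 0 ≤ j) :
    PySem.List.pyGetD (List.replicate k c) j d = if j < (k : Int) then c else d := by
  unfold PySem.List.pyGetD
  rw [PySem.List.pyGet?_of_nonneg _ hj, List.getElem?_replicate]
  by_cases h : j < (k : Int)
  · rw [if_pos (by omega), if_pos h]; rfl
  · rw [if_neg (by omega), if_neg h]; rfl

-- ---- structure extracted from the certificate ----

def pvFsts (seq : List (Int × Int × Int × Int)) : List Int := seq.map (·.1)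

def pvPi (seq : List (Int × Int × Int × Int)) (v : Int) : Int :=
  (((seq.map (fun t => (t.1, t.2.1))).lookup v).getD (-1))

def pvRk (seq : List (Int × Int × Int × Int)) (v : Int) : Nat := (pvFsts seq).idxOf v

def pvParArr (n : Int) (pi : Int → Int) : List Int :=
  (List.range n.toNat).map (fun w : Nat => if (w : Int) = 0 then -1 else pi (w : Int))

-- e is an edge joining v to p (in either orientation)
def pvConn (e : List Int) (v p : Int) : Prop :=
  (e.getD 0 0 = v ∧ e.getD 1 0 = p) ∨ (e.getD 0 0 = p ∧ e.getD 1 0 = v)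

/-- All the facts about the input the equivalence proof consumes: `pi` is the parent map of a
tree on the nodes `0..n-1` rooted at `0`, `rk` strictly increases along `pi`, and `adj` is an
adjacency list of exactly that tree. -/
structure PvTF (n : Int) (adj : List (List Int)) (pi : Int → Int) (rk : Int → Nat) : Prop where
  hn2 : 2 ≤ n
  hadjlen : adj.length = n.toNat
  hpiz : pi 0 = -1
  hout : ∀ v : Int, ¬(1 ≤ v ∧ v < n) → pi v = -1
  hrange : ∀ v : Int, 1 ≤ v → v < n → 0 ≤ pi v ∧ pi v < n
  hrk : ∀ v : Int, 1 ≤ v → v < n → rk v < rk (pi v)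
  hrkb : ∀ v : Int, 1 ≤ v → v < n → rk v < n.toNat
  hadj : ∀ u x : Int, 0 ≤ u → u < n →
    (PySem.List.pyGetD adj u []).count x
      = (if 1 ≤ u ∧ pi u = x then 1 else 0) + (if pi x = u then 1 else 0)

-- ---- the common mathematical value both programs compute ----

def pvAnc (n : Int) (pi : Int → Int) : Nat → Int → Int → Bool
  | 0, u, v => v == u
  | f+1, u, v => v == u || (decide (1 ≤ v) && decide (v < n) && pvAnc n pi f u (pi v))

def pvS (n : Int) (pi : Int → Int) (group : List Int) (v g : Int) : Int :=
  ((PySem.List.pyRange 0 n 1).countP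
    (fun w => pvAnc n pi n.toNat v w && (PySem.List.pyGetD group w 0 == g)) : Int)

def pvTerm (n : Int) (pi : Int → Int) (group gc : List Int) (v : Int) : Int :=
  ((PySem.List.pyRange 1 21 1).map
    (fun g => pvS n pi group v g * (PySem.List.pyGetD gc g 0 - pvS n pi group v g))).sum

def pvTotal (n : Int) (pi : Int → Int) (group gc : List Int) : Int :=
  ((PySem.List.pyRange 1 n 1).map (pvTerm n pi group gc)).sum

-- ---- generic fold lemmas ----

theorem pv_nodup_len_le (l l' : List Int) (h : l.Nodup) (hs : ∀ x ∈ l, x ∈ l') :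
    l.length ≤ l'.length := by
  calc l.length = l.toFinset.card := (List.toFinset_card_of_nodup h).symm
    _ ≤ l'.toFinset.card := Finset.card_le_card (fun x hx => by
        simp only [List.mem_toFinset] at *; exact hs x hx)
    _ ≤ l'.length := List.toFinset_card_le l'

theorem pv_foldl_cons_rev (L acc : List Int) :
    L.foldl (fun l v => v :: l) acc = L.reverse ++ acc := by
  induction L generalizing acc with
  | nil => rfl
  | cons v L ih => simp [ih]

theorem pv_setfold_len (L : List Int) (u : Int) (par : List Int) :
    (L.foldl (fun p v => PySem.List.pySetD p v u) par).length = par.length := by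
  induction L generalizing par with
  | nil => rfl
  | cons v L ih => simp [ih, PySem.List.length_pySetD]

theorem pv_setfold_get (L : List Int) (u : Int) (par : List Int) (w : Int) (d : Int)
    (hw : 0 ≤ w) (hL : ∀ v ∈ L, 0 ≤ v) :
    PySem.List.pyGetD (L.foldl (fun p v => PySem.List.pySetD p v u) par) w d
      = if w ∈ L ∧ w < (par.length : Int) then u else PySem.List.pyGetD par w d := by
  induction L generalizing par with
  | nil => simp
  | cons v L ih =>
    have hv : 0 ≤ v := hL v (by simp)
    rw [List.foldl_cons, ih _ (fun x hx => hL x (by simp [hx])),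
        PySem.List.length_pySetD, pv_getD_setD par v w u d hv hw]
    by_cases hlt : w < (par.length : Int)
    · by_cases hwL : w ∈ L
      · rw [if_pos ⟨hwL, hlt⟩, if_pos ⟨by simp [hwL], hlt⟩]
      · by_cases hwv : w = v
        · rw [if_neg (by tauto), if_pos ⟨hwv, by omega⟩, if_pos ⟨by simp [hwv], hlt⟩]
        · rw [if_neg (by tauto), if_neg (by tauto), if_neg (by
            rintro ⟨hm, _⟩
            rcases List.mem_cons.mp hm with h | h
            exacts [hwv h, hwL h])]
    · rw [if_neg (by tauto), if_neg (by rintro ⟨hwv, hvlt⟩; omega), if_neg (by tauto)]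

theorem pv_pushfold (comb : List Int → Int → List Int) (L : List Int) (u : Int)
    (rest par : List Int) (hu : 0 ≤ u) (hL : ∀ v ∈ L, 0 ≤ v ∧ v ≠ u) :
    L.foldl (fun (s : List Int × List Int) v =>
        if v ≠ PySem.List.pyGetD s.2 u (-1) then (comb s.1 v, PySem.List.pySetD s.2 v u) else s)
      (rest, par)
    = ((L.filter (fun v => decide (v ≠ PySem.List.pyGetD par u (-1)))).foldl comb rest,
       (L.filter (fun v => decide (v ≠ PySem.List.pyGetD par u (-1)))).foldl
         (fun p v => PySem.List.pySetD p v u) par) := by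
  induction L generalizing rest par with
  | nil => rfl
  | cons v L ih =>
    have hv0 : 0 ≤ v := (hL v (by simp)).1
    have hvu : v ≠ u := (hL v (by simp)).2
    by_cases hv : v = PySem.List.pyGetD par u (-1)
    · simp only [List.foldl_cons, List.filter_cons]
      rw [if_neg (by simpa using hv), if_neg (by simp [hv])]
      exact ih rest par (fun x hx => hL x (by simp [hx]))
    · have hkeep : PySem.List.pyGetD (PySem.List.pySetD par v u) u (-1)
          = PySem.List.pyGetD par u (-1) := by
        rw [pv_getD_setD par v u u (-1) hv0 hu, if_neg (by tauto)]
      simp only [List.foldl_cons, List.filter_cons]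
      rw [if_pos (by simpa using hv), if_pos (by simpa using hv), List.foldl_cons,
        List.foldl_cons,
        ih (comb rest v) (PySem.List.pySetD par v u) (fun x hx => hL x (by simp [hx])), hkeep]

theorem pv_getD_rangemap (g : Nat → Int) (k : Nat) (w : Int) (d : Int) (hw : 0 ≤ w) :
    PySem.List.pyGetD ((List.range k).map g) w d = if w < (k : Int) then g w.toNat else d := by
  by_cases h : w < (k : Int)
  · rw [PySem.List.pyGetD_eq_getElem _ d hw (by simp; omega), if_pos h]
    simp [List.getElem_map, List.getElem_range]
  · rw [if_neg h, PySem.List.pyGetD_of_none]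
    rw [PySem.List.pyGet?_eq_none_iff]
    intro ⟨_, hlt⟩; simp at hlt; omega

-- ---- children of a node, read off the adjacency row ----

theorem pv_row_mem (n : Int) (adj : List (List Int)) (pi : Int → Int) (rk : Int → Nat)
    (tf : PvTF n adj pi rk) (u : Int) (hu0 : 0 ≤ u) (hun : u < n) :
    ∀ v ∈ PySem.List.pyGetD adj u [], (0 ≤ v ∧ v < n) ∧ v ≠ u := by
  intro v hv
  have hc : 0 < (PySem.List.pyGetD adj u []).count v := List.count_pos_iff.mpr hv
  rw [tf.hadj u v hu0 hun] at hc
  have hpiu : pi u ≠ u := by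
    intro h
    have := tf.hrk u (by
      rcases (lt_or_ge u 1) with h1 | h1
      · exfalso; have : u = 0 := by omega
        rw [this] at h; exact absurd (tf.hpiz.symm.trans h) (by norm_num)
      · exact h1) hun
    rw [h] at this; omega
  by_cases h1 : 1 ≤ u ∧ pi u = v
  · rcases tf.hrange u h1.1 hun with ⟨ha, hb⟩
    refine ⟨⟨h1.2 ▸ ha, h1.2 ▸ hb⟩, ?_⟩
    intro h; exact hpiu (h ▸ h1.2)
  · rw [if_neg h1] at hc
    have h2 : pi v = u := by by_contra h2; rw [if_neg h2] at hc; omega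
    have hv1 : 1 ≤ v ∧ v < n := by
      by_contra hcon
      rw [tf.hout v hcon] at h2; omega
    refine ⟨⟨by omega, hv1.2⟩, ?_⟩
    intro h; rw [h] at h2; exact hpiu h2

theorem pv_pipi_ne (n : Int) (adj : List (List Int)) (pi : Int → Int) (rk : Int → Nat)
    (tf : PvTF n adj pi rk) (u : Int) (hu1 : 1 ≤ u) (hun : u < n) : pi (pi u) ≠ u := by
  intro h
  have h1 := tf.hrk u hu1 hun
  by_cases hz : 1 ≤ pi u ∧ pi u < n
  · have h2 := tf.hrk (pi u) hz.1 hz.2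
    rw [h] at h2; omega
  · rw [tf.hout (pi u) hz] at h; omega

theorem pv_kids_count (n : Int) (adj : List (List Int)) (pi : Int → Int) (rk : Int → Nat)
    (tf : PvTF n adj pi rk) (u : Int) (hu0 : 0 ≤ u) (hun : u < n) (x : Int) :
    ((PySem.List.pyGetD adj u []).filter
        (fun v => decide (v ≠ (if u = 0 then (-1 : Int) else pi u)))).count x
      = if pi x = u then 1 else 0 := by
  by_cases hx : x = (if u = 0 then (-1 : Int) else pi u)
  · rw [List.count_eq_zero.mpr (by
      intro hmem
      have := List.of_mem_filter hmem
      simp only [decide_eq_true_eq] at this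
      exact this hx)]
    by_cases hu : u = 0
    · rw [hu] at hx ⊢; simp only [if_true, eq_self_iff_true] at hx
      have hx' : x = -1 := by simpa using hx
      rw [if_neg (by rw [hx', tf.hout (-1) (by norm_num)]; norm_num)]
    · simp only [if_neg hu] at hx
      rw [if_neg (by rw [hx]; exact pv_pipi_ne n adj pi rk tf u (by omega) hun)]
  · rw [List.count_filter (by simpa using hx), tf.hadj u x hu0 hun]
    by_cases hu : u = 0
    · rw [if_neg (by rw [hu]; omega)]; omega
    · simp only [if_neg hu] at hx
      rw [if_neg (by intro ⟨_, h⟩; exact hx h.symm)]; omega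

-- ---- the DFS traversal invariant (port A) ----

def pvInvA (n : Int) (pi : Int → Int) (stack par order : List Int) : Prop :=
  (order ++ stack).Nodup ∧
  (∀ v ∈ order ++ stack, 0 ≤ v ∧ v < n) ∧
  (∀ v : Int, 0 ≤ v → v < n → (v ∈ order ++ stack ↔ v = 0 ∨ pi v ∈ order)) ∧
  par = (List.range n.toNat).map
    (fun w : Nat => if (w : Int) ≠ 0 ∧ pi (w : Int) ∈ order then pi (w : Int) else -1) ∧
  (∀ v ∈ order, v ≠ 0 → pi v ∈ order ∧ order.idxOf (pi v) < order.idxOf v)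

theorem pv_pi_ne_self (n : Int) (adj : List (List Int)) (pi : Int → Int) (rk : Int → Nat)
    (tf : PvTF n adj pi rk) (u : Int) (hu0 : 0 ≤ u) (hun : u < n) : pi u ≠ u := by
  by_cases h1 : 1 ≤ u
  · intro h; have := tf.hrk u h1 hun; rw [h] at this; omega
  · have hz : u = 0 := by omega
    rw [hz, tf.hpiz]; norm_num

theorem pv_stepCore (n : Int) (adj : List (List Int)) (pi : Int → Int) (rk : Int → Nat)
    (tf : PvTF n adj pi rk) (u : Int) (rest par order : List Int)
    (hinv : pvInvA n pi (u :: rest) par order) (stack' : List Int)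
    (hperm : stack'.Perm
      (((PySem.List.pyGetD adj u []).filter
          (fun v => decide (v ≠ PySem.List.pyGetD par u (-1)))) ++ rest)) :
    pvInvA n pi stack'
      (((PySem.List.pyGetD adj u []).filter
          (fun v => decide (v ≠ PySem.List.pyGetD par u (-1)))).foldl
        (fun p v => PySem.List.pySetD p v u) par)
      (order ++ [u]) := by
  obtain ⟨hnd, hmem, hiff, hpar, hord⟩ := hinv
  have hu : 0 ≤ u ∧ u < n := hmem u (by simp)
  have hndsplit := List.nodup_append.mp hnd
  have huo : u ∉ order := fun h => hndsplit.2.2 u h u (by simp) rfl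
  have hur : u ∉ rest := by
    have := hndsplit.2.1; rw [List.nodup_cons] at this; exact this.1
  have hparlen : par.length = n.toNat := by rw [hpar]; simp
  have hpu : PySem.List.pyGetD par u (-1) = if u = 0 then -1 else pi u := by
    rw [hpar, pv_getD_rangemap _ _ _ _ hu.1,
      if_pos (by rw [Int.toNat_of_nonneg (by have := tf.hn2; omega : (0:Int) ≤ n)]; exact hu.2)]
    rw [Int.toNat_of_nonneg hu.1]
    by_cases hz : u = 0
    · rw [if_pos hz, if_neg (by tauto)]
    · rw [if_neg hz]
      have hpio : pi u ∈ order := by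
        rcases (hiff u hu.1 hu.2).mp (by simp) with h | h
        · exact absurd h hz
        · exact h
      rw [if_pos ⟨hz, hpio⟩]
  have kcount : ∀ x : Int,
      ((PySem.List.pyGetD adj u []).filter
        (fun v => decide (v ≠ PySem.List.pyGetD par u (-1)))).count x
      = if pi x = u then 1 else 0 := by
    intro x; rw [hpu]; exact pv_kids_count n adj pi rk tf u hu.1 hu.2 x
  set kids := (PySem.List.pyGetD adj u []).filter
      (fun v => decide (v ≠ PySem.List.pyGetD par u (-1))) with hkids
  have kmem : ∀ x : Int, x ∈ kids ↔ pi x = u := by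
    intro x
    constructor
    · intro h
      have := List.count_pos_iff.mpr h
      rw [kcount x] at this
      by_contra hc; rw [if_neg hc] at this; omega
    · intro h
      have : kids.count x = 1 := by rw [kcount x, if_pos h]
      exact List.count_pos_iff.mp (by omega)
  have knodup : kids.Nodup := by
    rw [List.nodup_iff_count_le_one]
    intro a; rw [kcount a]; split_ifs <;> omega
  have krange : ∀ x ∈ kids, 1 ≤ x ∧ x < n := by
    intro x hx
    have hpix : pi x = u := (kmem x).mp hx
    by_contra hc
    rw [tf.hout x hc] at hpix; omega
  have kfresh : ∀ x ∈ kids, x ∉ order ∧ x ≠ u ∧ x ∉ rest := by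
    intro x hx
    have hpix : pi x = u := (kmem x).mp hx
    have hxr := krange x hx
    have hxold : x ∉ order ++ u :: rest := by
      intro hmemx
      rcases (hiff x (by omega) hxr.2).mp hmemx with h | h
      · omega
      · rw [hpix] at h; exact huo h
    refine ⟨fun h => hxold (by simp [h]), fun h => hxold (by simp [h]), fun h => hxold (by simp [h])⟩
  have kids0 : ∀ x ∈ kids, 0 ≤ x := fun x hx => by have := krange x hx; omega
  set par' := kids.foldl (fun p v => PySem.List.pySetD p v u) par with hpar'
  have hpar'len : par'.length = n.toNat := by rw [hpar', pv_setfold_len, hparlen]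
  have hpar'eq : par' = (List.range n.toNat).map
      (fun w : Nat => if (w : Int) ≠ 0 ∧ pi (w : Int) ∈ order ++ [u] then pi (w : Int) else -1) := by
    have hNn : (n.toNat : Int) = n := Int.toNat_of_nonneg (by have := tf.hn2; omega)
    apply List.ext_getElem (by rw [hpar'len]; simp)
    intro k h1 h2
    have hkN : k < n.toNat := by rwa [hpar'len] at h1
    have hk : (k : Int) < n := by omega
    have hgetl : par'[k] = PySem.List.pyGetD par' (k : Int) (-1) := by
      rw [PySem.List.pyGetD_eq_getElem par' (-1) (by positivity) (by rw [hpar'len]; exact_mod_cast hkN)]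
      simp
    have hkInt : (k : Int) < ((n.toNat : Nat) : Int) := by exact_mod_cast hkN
    rw [hgetl, hpar', pv_setfold_get kids u par (k : Int) (-1) (by positivity) kids0]
    rw [hpar, pv_getD_rangemap _ _ _ _ (by positivity)]
    simp only [List.length_map, List.length_range, List.getElem_map, List.getElem_range,
      Int.toNat_natCast]
    rw [if_pos hkInt]
    by_cases hks : (k : Int) ∈ kids
    · rw [if_pos ⟨hks, hkInt⟩]
      have hpik : pi (k : Int) = u := (kmem _).mp hks
      have := krange _ hks
      rw [if_pos ⟨by omega, by rw [hpik]; simp⟩, hpik]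
    · rw [if_neg (by tauto)]
      by_cases hc : (k : Int) ≠ 0 ∧ pi (k : Int) ∈ order
      · rw [if_pos hc, if_pos ⟨hc.1, by simp [hc.2]⟩]
      · rw [if_neg hc, if_neg (by
          rintro ⟨hk0, hmem'⟩
          rcases List.mem_append.mp hmem' with h | h
          · exact hc ⟨hk0, h⟩
          · simp only [List.mem_singleton] at h
            exact hks ((kmem _).mpr h))]
  have hmemnew : ∀ v : Int, v ∈ (order ++ [u]) ++ stack' ↔
      v ∈ order ∨ v = u ∨ v ∈ kids ∨ v ∈ rest := by
    intro v
    simp only [List.mem_append, List.mem_singleton, hperm.mem_iff, List.mem_append]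
    tauto
  refine ⟨?_, ?_, ?_, hpar'eq, ?_⟩
  · -- Nodup
    have hnd1 := List.nodup_iff_count_le_one.mp hnd
    rw [List.nodup_iff_count_le_one]
    intro a
    have hperm2 : ((order ++ [u]) ++ stack').Perm ((order ++ u :: rest) ++ kids) := by
      refine (List.Perm.append_left _ hperm).trans ?_
      refine List.perm_iff_count.mpr (fun b => ?_)
      simp only [List.count_append, List.count_cons, List.count_nil]
      split_ifs <;> omega
    rw [hperm2.count_eq, List.count_append]
    have h2 := hnd1 a
    rw [kcount a]
    by_cases hpa : pi a = u
    · have haf := kfresh a ((kmem a).mpr hpa)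
      have : a ∉ order ++ u :: rest := by
        intro h
        rcases List.mem_append.mp h with h | h
        · exact haf.1 h
        · rcases List.mem_cons.mp h with h | h
          exacts [haf.2.1 h, haf.2.2 h]
      rw [List.count_eq_zero.mpr this, if_pos hpa]
    · rw [if_neg hpa]; omega
  · -- membership range
    intro v hv
    rcases (hmemnew v).mp hv with h | h | h | h
    · exact hmem v (by simp [h])
    · exact hmem v (by simp [h])
    · have := krange v h; constructor <;> omega
    · exact hmem v (by simp [h])
  · -- characterisation of the visited/pending set
    intro v hv0 hvn
    rw [hmemnew v]
    constructor
    · rintro (h | h | h | h)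
      · rcases (hiff v hv0 hvn).mp (by simp [h]) with h' | h'
        · exact Or.inl h'
        · exact Or.inr (by simp [h'])
      · rcases (hiff v hv0 hvn).mp (by simp [h]) with h' | h'
        · exact Or.inl h'
        · exact Or.inr (by simp [h'])
      · exact Or.inr (by simp [(kmem v).mp h])
      · rcases (hiff v hv0 hvn).mp (by simp [h]) with h' | h'
        · exact Or.inl h'
        · exact Or.inr (by simp [h'])
    · rintro (h | h)
      · have : v ∈ order ++ u :: rest := (hiff v hv0 hvn).mpr (Or.inl h)
        rcases List.mem_append.mp this with h' | h'
        · exact Or.inl h'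
        · rcases List.mem_cons.mp h' with h' | h'
          exacts [Or.inr (Or.inl h'), Or.inr (Or.inr (Or.inr h'))]
      · rcases List.mem_append.mp h with h' | h'
        · have : v ∈ order ++ u :: rest := (hiff v hv0 hvn).mpr (Or.inr h')
          rcases List.mem_append.mp this with h'' | h''
          · exact Or.inl h''
          · rcases List.mem_cons.mp h'' with h'' | h''
            exacts [Or.inr (Or.inl h''), Or.inr (Or.inr (Or.inr h''))]
        · simp only [List.mem_singleton] at h'
          exact Or.inr (Or.inr (Or.inl ((kmem v).mpr h')))
  · -- position ordering inside the visited list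
    intro v hv hv0
    rcases List.mem_append.mp hv with h | h
    · have hold := hord v h hv0
      have hpiv : pi v ∈ order ++ [u] := by simp [hold.1]
      refine ⟨hpiv, ?_⟩
      rw [List.idxOf_append, if_pos hold.1, List.idxOf_append, if_pos h]
      exact hold.2
    · simp only [List.mem_singleton] at h
      subst h
      have hpio : pi v ∈ order := by
        rcases (hiff v hu.1 hu.2).mp (by simp) with h' | h'
        · exact absurd h' hv0
        · exact h'
      refine ⟨by simp [hpio], ?_⟩
      rw [List.idxOf_append, if_pos hpio, List.idxOf_append, if_neg huo]
      have := List.idxOf_lt_length_of_mem hpio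
      simp only [List.idxOf_cons, BEq.rfl, cond_true]
      omega

theorem pv_order_le (n : Int) (order stack : List Int)
    (hnd : (order ++ stack).Nodup) (hmem : ∀ v ∈ order ++ stack, 0 ≤ v ∧ v < n) :
    order.length ≤ n.toNat := by
  have h1 : order.Nodup := (List.nodup_append.mp hnd).1
  have h2 := pv_nodup_len_le order (PySem.List.pyRange 0 n 1) h1 (fun x hx => by
    rw [PySem.List.mem_pyRange_one]
    have := hmem x (by simp [hx])
    omega)
  rw [PySem.List.length_pyRange_one] at h2
  simpa using h2

theorem pv_all_mem (n : Int) (adj : List (List Int)) (pi : Int → Int) (rk : Int → Nat)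
    (tf : PvTF n adj pi rk) (order : List Int)
    (hiff : ∀ v : Int, 0 ≤ v → v < n → (v ∈ order ↔ v = 0 ∨ pi v ∈ order)) :
    ∀ v : Int, 0 ≤ v → v < n → v ∈ order := by
  have h0 : (0 : Int) ∈ order := (hiff 0 le_rfl (by have := tf.hn2; omega)).mpr (Or.inl rfl)
  have H : ∀ (m : Nat) (v : Int), 0 ≤ v → v < n → n.toNat ≤ m + rk v → v ∈ order := by
    intro m
    induction m with
    | zero =>
      intro v hv0 hvn hb
      by_cases hz : v = 0
      · exact hz ▸ h0
      · exact absurd (tf.hrkb v (by omega) hvn) (by omega)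
    | succ m ih =>
      intro v hv0 hvn hb
      by_cases hz : v = 0
      · exact hz ▸ h0
      · have hr := tf.hrange v (by omega) hvn
        by_cases hp0 : pi v = 0
        · exact (hiff v hv0 hvn).mpr (Or.inr (hp0 ▸ h0))
        · have hrk := tf.hrk v (by omega) hvn
          have hpmem : pi v ∈ order := ih (pi v) hr.1 hr.2 (by omega)
          exact (hiff v hv0 hvn).mpr (Or.inr hpmem)
  intro v hv0 hvn
  exact H n.toNat v hv0 hvn (by omega)

theorem pv_runA (n : Int) (adj : List (List Int)) (pi : Int → Int) (rk : Int → Nat)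
    (tf : PvTF n adj pi rk) :
    ∀ (fuel : Nat) (stack par order : List Int),
      pvInvA n pi stack par order → n.toNat + 1 ≤ fuel + order.length →
      ∃ par' order', dfsLoopA adj fuel (stack, par, order) = ([], par', order')
        ∧ pvInvA n pi [] par' order' := by
  intro fuel
  induction fuel with
  | zero =>
    intro stack par order hinv hfuel
    exact absurd (pv_order_le n order stack hinv.1 hinv.2.1) (by omega)
  | succ fuel ih =>
    intro stack par order hinv hfuel
    match stack with
    | [] => exact ⟨par, order, rfl, hinv⟩
    | u :: rest =>
      have hu : 0 ≤ u ∧ u < n := hinv.2.1 u (by simp)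
      have hrow := pv_row_mem n adj pi rk tf u hu.1 hu.2
      show ∃ par' order',
        dfsLoopA adj fuel
          (((PySem.List.pyGetD adj u []).foldl
            (fun (s : List Int × List Int) v =>
              if v ≠ PySem.List.pyGetD s.2 u (-1) then (v :: s.1, PySem.List.pySetD s.2 v u) else s)
            (rest, par)).1,
           ((PySem.List.pyGetD adj u []).foldl
            (fun (s : List Int × List Int) v =>
              if v ≠ PySem.List.pyGetD s.2 u (-1) then (v :: s.1, PySem.List.pySetD s.2 v u) else s)
            (rest, par)).2, order ++ [u]) = ([], par', order') ∧ pvInvA n pi [] par' order'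
      rw [pv_pushfold (fun l v => v :: l) _ u rest par hu.1
        (fun v hv => ⟨(hrow v hv).1.1, (hrow v hv).2⟩)]
      rw [pv_foldl_cons_rev]
      refine ih _ _ _ (pv_stepCore n adj pi rk tf u rest par order hinv _
        (List.Perm.append_right rest (List.reverse_perm _))) ?_
      simp only [List.length_append, List.length_cons, List.length_nil]
      omega

theorem pv_inv_final (n : Int) (adj : List (List Int)) (pi : Int → Int) (rk : Int → Nat)
    (tf : PvTF n adj pi rk) (par order : List Int) (hinv : pvInvA n pi [] par order) :
    par = pvParArr n pi
    ∧ order.Nodup ∧ (∀ v : Int, v ∈ order ↔ 0 ≤ v ∧ v < n)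
    ∧ (∀ v ∈ order, v ≠ 0 → order.idxOf (pi v) < order.idxOf v) := by
  obtain ⟨hnd, hmem, hiff, hpar, hord⟩ := hinv
  simp only [List.append_nil] at hnd hmem hiff
  have hall := pv_all_mem n adj pi rk tf order hiff
  refine ⟨?_, hnd, ?_, fun v hv h0 => (hord v hv h0).2⟩
  · rw [hpar]
    unfold pvParArr
    apply List.map_congr_left
    intro a ha
    rw [List.mem_range] at ha
    by_cases hz : (a : Int) = 0
    · rw [if_neg (by tauto), if_pos hz]
    · have ha' : (a : Int) < n := by
        have : ((n.toNat : Nat) : Int) = n := Int.toNat_of_nonneg (by have := tf.hn2; omega)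
        omega
      have hr := tf.hrange (a : Int) (by omega) ha'
      rw [if_pos ⟨hz, hall _ hr.1 hr.2⟩, if_neg hz]
  · intro v
    exact ⟨fun h => hmem v h, fun h => hall v h.1 h.2⟩

theorem pv_inv_init (n : Int) (pi : Int → Int) (hn2 : 2 ≤ n) (hpiz : pi 0 = -1)
    (hout : ∀ v : Int, ¬(1 ≤ v ∧ v < n) → pi v = -1) :
    pvInvA n pi [0] (List.replicate n.toNat (-1 : Int)) [] := by
  refine ⟨by simp, ?_, ?_, ?_, by simp⟩
  · intro v hv
    simp only [List.nil_append, List.mem_singleton] at hv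
    subst hv; omega
  · intro v hv0 hvn
    simp only [List.nil_append, List.mem_singleton, List.not_mem_nil]
    constructor
    · rintro rfl; exact Or.inl rfl
    · rintro (rfl | h)
      · rfl
      · exact absurd h (by simp)
  · symm
    rw [List.eq_replicate_iff]
    refine ⟨by simp, ?_⟩
    intro b hb
    simp only [List.mem_map, List.mem_range] at hb
    obtain ⟨w, _, hw⟩ := hb
    rw [← hw, if_neg (by simp)]

-- ---- ancestor chains and subtree counts ----

theorem pv_countP_intsum (l : List Int) (p : Int → Bool) :
    ((l.countP p : Nat) : Int) = (l.map (fun w => if p w then (1 : Int) else 0)).sum := by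
  induction l with
  | nil => simp
  | cons w l ih =>
    rw [List.countP_cons, List.map_cons, List.sum_cons, ← ih]
    by_cases h : p w <;> simp [h] <;> omega

theorem pv_sum_swap (ws cs : List Int) (F : Int → Int → Int) :
    (ws.map (fun w => (cs.map (fun c => F c w)).sum)).sum
      = (cs.map (fun c => (ws.map (fun w => F c w)).sum)).sum := by
  induction cs generalizing ws with
  | nil => simp
  | cons c cs ih =>
    simp only [List.map_cons, List.sum_cons]
    rw [← ih ws]
    induction ws with
    | nil => simp
    | cons w ws ihw =>
      simp only [List.map_cons, List.sum_cons]
      rw [ihw]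
      ring

theorem pv_anc_zero (n : Int) (pi : Int → Int) (u : Int) (f : Nat) :
    pvAnc n pi f u 0 = (0 == u) := by
  cases f with
  | zero => rfl
  | succ f => simp [pvAnc]

theorem pv_anc_stable (n : Int) (adj : List (List Int)) (pi : Int → Int) (rk : Int → Nat)
    (tf : PvTF n adj pi rk) (u : Int) :
    ∀ (d : Nat) (w : Int), 0 ≤ w → w < n → (w ≠ 0 → n.toNat ≤ d + rk w) →
      ∀ f g : Nat, d ≤ f → d ≤ g → pvAnc n pi f u w = pvAnc n pi g u w := by
  intro d
  induction d with
  | zero =>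
    intro w hw0 hwn hb f g _ _
    have hwz : w = 0 := by
      by_contra hc
      exact absurd (tf.hrkb w (by omega) hwn) (by have := hb hc; omega)
    rw [hwz, pv_anc_zero, pv_anc_zero]
  | succ d ih =>
    intro w hw0 hwn hb f g hf hg
    match f, g with
    | f+1, g+1 =>
      by_cases hwz : w = 0
      · rw [hwz, pv_anc_zero, pv_anc_zero]
      · have hr := tf.hrange w (by omega) hwn
        have hrk := tf.hrk w (by omega) hwn
        show (w == u || (decide (1 ≤ w) && decide (w < n) && pvAnc n pi f u (pi w)))
          = (w == u || (decide (1 ≤ w) && decide (w < n) && pvAnc n pi g u (pi w)))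
        rw [ih (pi w) hr.1 hr.2 (fun _ => by have := hb hwz; omega) f g (by omega) (by omega)]

theorem pv_anc_self (n : Int) (pi : Int → Int) (u : Int) (f : Nat) :
    pvAnc n pi f u u = true := by
  cases f with
  | zero => simp [pvAnc]
  | succ f => simp [pvAnc]

theorem pv_anc_step (n : Int) (adj : List (List Int)) (pi : Int → Int) (rk : Int → Nat)
    (tf : PvTF n adj pi rk) (u w : Int) (hw1 : 1 ≤ w) (hwn : w < n) :
    pvAnc n pi n.toNat u w = ((w == u) || pvAnc n pi n.toNat u (pi w)) := by
  have hN : 1 ≤ n.toNat := by have := tf.hn2; omega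
  have hr := tf.hrange w hw1 hwn
  have hrk0 : 1 ≤ rk (pi w) := by
    have := tf.hrk w hw1 hwn; omega
  obtain ⟨N', hN'⟩ : ∃ N', n.toNat = N' + 1 := ⟨n.toNat - 1, by omega⟩
  rw [hN']
  show (w == u || (decide (1 ≤ w) && decide (w < n) && pvAnc n pi N' u (pi w))) = _
  rw [decide_eq_true hw1, decide_eq_true hwn]
  simp only [Bool.true_and]
  congr 1
  exact pv_anc_stable n adj pi rk tf u N' (pi w) hr.1 hr.2 (fun _ => by omega)
    N' (N' + 1) le_rfl (by omega)

theorem pv_anc_rank (n : Int) (adj : List (List Int)) (pi : Int → Int) (rk : Int → Nat)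
    (tf : PvTF n adj pi rk) (u : Int) :
    ∀ (d : Nat) (w : Int), 0 ≤ w → w < n → n.toNat ≤ d + rk w →
      pvAnc n pi n.toNat u w = true → w = u ∨ rk w < rk u := by
  intro d
  induction d with
  | zero =>
    intro w hw0 hwn hb ha
    by_cases hwz : w = 0
    · rw [hwz, pv_anc_zero] at ha
      left; rw [hwz]; exact beq_iff_eq.mp ha
    · exact absurd (tf.hrkb w (by omega) hwn) (by omega)
  | succ d ih =>
    intro w hw0 hwn hb ha
    by_cases hwu : w = u
    · exact Or.inl hwu
    · by_cases hwz : w = 0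
      · rw [hwz, pv_anc_zero] at ha
        exact Or.inl (by rw [hwz]; exact beq_iff_eq.mp ha)
      · rw [pv_anc_step n adj pi rk tf u w (by omega) hwn] at ha
        have ha' : pvAnc n pi n.toNat u (pi w) = true := by
          rcases Bool.or_eq_true_iff.mp ha with h | h
          · exact absurd (beq_iff_eq.mp h) hwu
          · exact h
        have hr := tf.hrange w (by omega) hwn
        have hrk := tf.hrk w (by omega) hwn
        rcases ih (pi w) hr.1 hr.2 (by omega) ha' with h | h
        · right; rw [← h]; exact hrk
        · right; omega

def pvKidsList (n : Int) (pi : Int → Int) (u : Int) : List Int :=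
  (PySem.List.pyRange 1 n 1).filter (fun x => decide (pi x = u))

theorem pv_sum_indicator (l : List Int) (hnd : l.Nodup) (w : Int) :
    (l.map (fun c => if w = c then (1 : Int) else 0)).sum = if w ∈ l then 1 else 0 := by
  induction l with
  | nil => simp
  | cons c l ih =>
    rw [List.nodup_cons] at hnd
    rw [List.map_cons, List.sum_cons, ih hnd.2]
    by_cases hwc : w = c
    · subst hwc
      rw [if_pos rfl, if_neg hnd.1, if_pos (List.mem_cons_self)]
      norm_num
    · rw [if_neg hwc]
      by_cases hwl : w ∈ l
      · rw [if_pos hwl, if_pos (List.mem_cons_of_mem c hwl)]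
        ring
      · rw [if_neg hwl, if_neg (by simp [hwc, hwl])]
        ring

theorem pv_point (n : Int) (adj : List (List Int)) (pi : Int → Int) (rk : Int → Nat)
    (tf : PvTF n adj pi rk) (u : Int) (hu0 : 0 ≤ u) (hun : u < n) :
    ∀ (d : Nat) (w : Int), 0 ≤ w → w < n → (w ≠ 0 → w ≠ u → n.toNat ≤ d + rk w) →
      (if pvAnc n pi n.toNat u w then (1 : Int) else 0)
        = (if w = u then (1 : Int) else 0)
          + ((pvKidsList n pi u).map
              (fun c => if pvAnc n pi n.toNat c w then (1 : Int) else 0)).sum := by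
  have hkmem : ∀ c, c ∈ pvKidsList n pi u ↔ (1 ≤ c ∧ c < n ∧ pi c = u) := by
    intro c
    rw [pvKidsList, List.mem_filter, PySem.List.mem_pyRange_one]
    simp only [decide_eq_true_eq]
    tauto
  have hknd : (pvKidsList n pi u).Nodup :=
    List.Nodup.filter _ (PySem.List.nodup_pyRange_one 1 n)
  have hsum_zero : ∀ z : Int, (∀ c ∈ pvKidsList n pi u, pvAnc n pi n.toNat c z = false) →
      ((pvKidsList n pi u).map
        (fun c => if pvAnc n pi n.toNat c z then (1 : Int) else 0)).sum = 0 := by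
    intro z hz
    rw [List.sum_eq_zero]
    intro x hx
    obtain ⟨c, hc, hcx⟩ := List.mem_map.mp hx
    rw [hz c hc] at hcx
    simpa using hcx.symm
  have hself : ∀ w : Int, w = u →
      (if pvAnc n pi n.toNat u w then (1 : Int) else 0)
        = (if w = u then (1 : Int) else 0)
          + ((pvKidsList n pi u).map
              (fun c => if pvAnc n pi n.toNat c w then (1 : Int) else 0)).sum := by
    intro w hwu
    subst hwu
    rw [if_pos (pv_anc_self n pi w n.toNat), if_pos rfl,
      hsum_zero w (fun c hc => by
        obtain ⟨hc1, hcn, hcp⟩ := (hkmem c).mp hc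
        by_contra hcon
        rw [Bool.not_eq_false] at hcon
        rcases pv_anc_rank n adj pi rk tf c n.toNat w hu0 hun (by omega) hcon with h | h
        · exact pv_pi_ne_self n adj pi rk tf c (by omega) hcn (by rw [hcp]; exact h)
        · have := tf.hrk c hc1 hcn
          rw [hcp] at this
          omega)]
    norm_num
  have hzero : ∀ w : Int, w = 0 → w ≠ u →
      (if pvAnc n pi n.toNat u w then (1 : Int) else 0)
        = (if w = u then (1 : Int) else 0)
          + ((pvKidsList n pi u).map
              (fun c => if pvAnc n pi n.toNat c w then (1 : Int) else 0)).sum := by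
    intro w hwz hwu
    subst hwz
    rw [pv_anc_zero,
      hsum_zero 0 (fun c hc => by
        obtain ⟨hc1, _, _⟩ := (hkmem c).mp hc
        rw [pv_anc_zero]
        simp only [beq_eq_false_iff_ne, ne_eq]
        omega),
      if_neg hwu]
    have : (0 == u) = false := by
      simp only [beq_eq_false_iff_ne, ne_eq]
      exact fun h => hwu h
    rw [this]
    simp
  intro d
  induction d with
  | zero =>
    intro w hw0 hwn hb
    by_cases hwu : w = u
    · exact hself w hwu
    · by_cases hwz : w = 0
      · exact hzero w hwz hwu
      · exact absurd (tf.hrkb w (by omega) hwn) (by have := hb hwz hwu; omega)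
  | succ d ih =>
    intro w hw0 hwn hb
    by_cases hwu : w = u
    · exact hself w hwu
    · by_cases hwz : w = 0
      · exact hzero w hwz hwu
      · have hr := tf.hrange w (by omega) hwn
        have hrk := tf.hrk w (by omega) hwn
        have hul : (if pvAnc n pi n.toNat u w then (1 : Int) else 0)
            = (if pvAnc n pi n.toNat u (pi w) then (1 : Int) else 0) := by
          rw [pv_anc_step n adj pi rk tf u w (by omega) hwn,
            (by simp [hwu] : (w == u) = false), Bool.false_or]
        have hcstep : ∀ c ∈ pvKidsList n pi u,
            (if pvAnc n pi n.toNat c w then (1 : Int) else 0)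
              = (if w = c then (1 : Int) else 0)
                + (if pvAnc n pi n.toNat c (pi w) then (1 : Int) else 0) := by
          intro c hc
          obtain ⟨hc1, hcn, hcp⟩ := (hkmem c).mp hc
          rw [pv_anc_step n adj pi rk tf c w (by omega) hwn]
          by_cases hwc : w = c
          · have hanc : pvAnc n pi n.toNat c (pi w) = false := by
              by_contra hcon
              rw [Bool.not_eq_false] at hcon
              have hrk' : rk c < rk (pi c) := by rw [hwc] at hrk; exact hrk
              rcases pv_anc_rank n adj pi rk tf c n.toNat (pi w) hr.1 hr.2 (by omega)
                  hcon with h | h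
              · rw [hwc] at h
                exact pv_pi_ne_self n adj pi rk tf c (by omega) hcn h
              · rw [hwc] at h; omega
            rw [hanc, if_pos hwc, (by simp [hwc] : (w == c) = true)]
            simp
          · rw [if_neg hwc, (by simp [hwc] : (w == c) = false), Bool.false_or]
            ring
        rw [hul, List.map_congr_left hcstep,
          ih (pi w) hr.1 hr.2 (fun _ _ => by omega),
          PySem.List.sum_map_add_int]
        have hindic : ((pvKidsList n pi u).map
            (fun c => if w = c then (1 : Int) else 0)).sum
            = if pi w = u then (1 : Int) else 0 := by
          rw [pv_sum_indicator _ hknd w]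
          by_cases hp : pi w = u
          · rw [if_pos ((hkmem w).mpr ⟨by omega, hwn, hp⟩), if_pos hp]
          · rw [if_neg (fun hm => hp ((hkmem w).mp hm).2.2), if_neg hp]
        rw [hindic, if_neg hwu]
        ring

theorem pv_sum_indicatorK (l : List Int) (hnd : l.Nodup) (u : Int) (K : Int) :
    (l.map (fun c => if c = u then K else 0)).sum = if u ∈ l then K else 0 := by
  induction l with
  | nil => simp
  | cons c l ih =>
    rw [List.nodup_cons] at hnd
    rw [List.map_cons, List.sum_cons, ih hnd.2]
    by_cases hcu : c = u
    · subst hcu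
      rw [if_pos rfl, if_neg hnd.1, if_pos List.mem_cons_self]
      ring
    · rw [if_neg hcu]
      by_cases hul : u ∈ l
      · rw [if_pos hul, if_pos (List.mem_cons_of_mem c hul)]
        ring
      · rw [if_neg hul, if_neg (by simp [hul]; exact fun h => hcu h.symm)]
        ring

theorem pv_S_partition (n : Int) (adj : List (List Int)) (pi : Int → Int) (rk : Int → Nat)
    (tf : PvTF n adj pi rk) (group : List Int) (u g : Int) (hu0 : 0 ≤ u) (hun : u < n) :
    pvS n pi group u g = (if PySem.List.pyGetD group u 0 == g then (1 : Int) else 0)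
      + ((pvKidsList n pi u).map (fun c => pvS n pi group c g)).sum := by
  unfold pvS
  rw [pv_countP_intsum]
  have hpw : ∀ w ∈ PySem.List.pyRange 0 n 1,
      (if (pvAnc n pi n.toNat u w && (PySem.List.pyGetD group w 0 == g)) = true
        then (1 : Int) else 0)
      = (if w = u then (if (PySem.List.pyGetD group u 0 == g) = true then (1 : Int) else 0)
          else 0)
        + ((pvKidsList n pi u).map (fun c =>
            if (pvAnc n pi n.toNat c w && (PySem.List.pyGetD group w 0 == g)) = true
              then (1 : Int) else 0)).sum := by
    intro w hw
    rw [PySem.List.mem_pyRange_one] at hw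
    by_cases hgm : (PySem.List.pyGetD group w 0 == g) = true
    · have h1 : ∀ A : Bool, (if (A && (PySem.List.pyGetD group w 0 == g)) = true
          then (1 : Int) else 0) = if A = true then (1 : Int) else 0 := by
        intro A; rw [hgm]; cases A <;> simp
      rw [h1, List.map_congr_left (fun c _ => h1 _),
        pv_point n adj pi rk tf u hu0 hun n.toNat w hw.1 hw.2 (fun _ _ => by omega)]
      congr 1
      by_cases hwu : w = u
      · subst hwu
        rw [if_pos rfl, if_pos rfl, if_pos hgm]
      · rw [if_neg hwu, if_neg hwu]
    · have hgm' : (PySem.List.pyGetD group w 0 == g) = false := by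
        revert hgm; cases (PySem.List.pyGetD group w 0 == g) <;> simp
      have h0 : ∀ A : Bool, (if (A && (PySem.List.pyGetD group w 0 == g)) = true
          then (1 : Int) else 0) = 0 := by
        intro A; rw [hgm']; cases A <;> simp
      rw [h0, List.map_congr_left (fun c _ => h0 _)]
      have hz : (if w = u then (if (PySem.List.pyGetD group u 0 == g) = true
          then (1 : Int) else 0) else 0) = 0 := by
        by_cases hwu : w = u
        · subst hwu; rw [if_pos rfl, if_neg hgm]
        · rw [if_neg hwu]
      rw [hz]
      simp
  rw [List.map_congr_left hpw, PySem.List.sum_map_add_int]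
  congr 1
  · rw [pv_sum_indicatorK _ (PySem.List.nodup_pyRange_one 0 n) u _,
      if_pos (by rw [PySem.List.mem_pyRange_one]; exact ⟨hu0, hun⟩)]
  · rw [pv_sum_swap]
    congr 1
    apply List.map_congr_left
    intro c _
    rw [← pv_countP_intsum]

theorem pv_countP_or (l : List (Int × Int × Int × Int))
    (P Q : Int × Int × Int × Int → Bool) (hd : ∀ t ∈ l, ¬(P t = true ∧ Q t = true)) :
    l.countP (fun t => P t || Q t) = l.countP P + l.countP Q := by
  induction l with
  | nil => simp
  | cons t l ih =>
    rw [List.countP_cons, List.countP_cons, List.countP_cons,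
      ih (fun s hs => hd s (by simp [hs]))]
    have := hd t (by simp)
    cases hP : P t <;> cases hQ : Q t <;> simp_all <;> omega

theorem pv_lookup_countP (seq : List (Int × Int × Int × Int)) (hnd : (seq.map (·.1)).Nodup)
    (u x : Int) :
    seq.countP (fun t => t.1 == u && t.2.1 == x)
      = if ((seq.map (fun t => (t.1, t.2.1))).lookup u) = some x then 1 else 0 := by
  induction seq with
  | nil => simp
  | cons t l ih =>
    rw [List.map_cons, List.nodup_cons] at hnd
    rw [List.countP_cons, List.map_cons, List.lookup_cons]
    by_cases ht : t.1 = u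
    · have hnone : l.countP (fun t => t.1 == u && t.2.1 == x) = 0 := by
        rw [List.countP_eq_zero]
        intro s hs
        simp only [Bool.and_eq_true, beq_iff_eq, not_and]
        intro h1 _
        exact absurd (by rw [ht, ← h1]; exact List.mem_map_of_mem hs) hnd.1
      rw [hnone]
      by_cases hx : t.2.1 = x <;> simp [ht, hx]
    · rw [ih hnd.2]
      have hbeq : (u == t.1) = false := by simp; exact fun h => ht h.symm
      simp [hbeq, ht]

theorem pv_idxOf_drop_le (l : List Int) (hnd : l.Nodup) (p : Int) (m : Nat)
    (h : p ∈ l.drop m) : m ≤ l.idxOf p := by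
  by_contra hc
  push_neg at hc
  have hpl : p ∈ l := List.mem_of_mem_drop h
  have hidx := List.idxOf_lt_length_of_mem hpl
  obtain ⟨k, hk, hget⟩ := List.getElem_of_mem h
  rw [List.getElem_drop] at hget
  have hlt : m + k < l.length := by rw [List.length_drop] at hk; omega
  have : l.idxOf p = m + k := by
    rw [← hget]; exact List.Nodup.idxOf_getElem hnd (m + k) hlt
  omega

def pvAdjStep (a : List (List Int)) (e : List Int) : List (List Int) :=
  let u := PySem.List.pyGetD e 0 0
  let v := PySem.List.pyGetD e 1 0
  let a1 := PySem.List.pySetD a u (PySem.List.pyGetD a u [] ++ [v])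
  PySem.List.pySetD a1 v (PySem.List.pyGetD a1 v [] ++ [u])

theorem pv_adjfold_len (edges : List (List Int)) (acc : List (List Int)) :
    (edges.foldl pvAdjStep acc).length = acc.length := by
  induction edges generalizing acc with
  | nil => rfl
  | cons e es ih => rw [List.foldl_cons, ih]; simp [pvAdjStep, PySem.List.length_pySetD]

theorem pv_adjfold_count (n : Int) (edges : List (List Int))
    (hsh : ∀ e ∈ edges, e.length = 2 ∧ 0 ≤ e.getD 0 0 ∧ e.getD 0 0 < n ∧ 0 ≤ e.getD 1 0
        ∧ e.getD 1 0 < n ∧ e.getD 0 0 ≠ e.getD 1 0) :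
    ∀ (acc : List (List Int)) (u x : Int), acc.length = n.toNat → 0 ≤ u → u < n →
      (PySem.List.pyGetD (edges.foldl pvAdjStep acc) u []).count x
        = (PySem.List.pyGetD acc u []).count x
          + edges.countP (fun e => (e.getD 0 0 == u && e.getD 1 0 == x)
              || (e.getD 0 0 == x && e.getD 1 0 == u)) := by
  revert hsh
  induction edges with
  | nil => intro _ acc u x _ _ _; simp
  | cons e es ih =>
    intro hsh acc u x hlen hu0 hun
    obtain ⟨he2, ha0, han, hb0, hbn, hab⟩ := hsh e (by simp)
    have hsh' : ∀ e ∈ es, e.length = 2 ∧ 0 ≤ e.getD 0 0 ∧ e.getD 0 0 < n ∧ 0 ≤ e.getD 1 0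
        ∧ e.getD 1 0 < n ∧ e.getD 0 0 ≠ e.getD 1 0 := fun e he => hsh e (by simp [he])
    have hg0 : PySem.List.pyGetD e 0 0 = e.getD 0 0 := PySem.List.pyGetD_zero e 0
    have hg1 : PySem.List.pyGetD e 1 0 = e.getD 1 0 := by
      have : ((1 : Nat) : Int) = (1 : Int) := rfl
      rw [← this, PySem.List.pyGetD_natCast]
    set a := e.getD 0 0 with hadef
    set b := e.getD 1 0 with hbdef
    have hstep : ∀ w : Int, 0 ≤ w → w < n →
        PySem.List.pyGetD (pvAdjStep acc e) w []
          = if w = b then PySem.List.pyGetD acc b [] ++ [a]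
            else if w = a then PySem.List.pyGetD acc a [] ++ [b]
            else PySem.List.pyGetD acc w [] := by
      intro w hw0 hwn
      have hcast : ((n.toNat : Nat) : Int) = n := Int.toNat_of_nonneg (by omega)
      have h1 : PySem.List.pyGetD (PySem.List.pySetD acc a (PySem.List.pyGetD acc a [] ++ [b])) b []
          = PySem.List.pyGetD acc b [] := by
        rw [pv_getD_setD _ a b _ [] ha0 hb0, if_neg (by intro hc; exact hab hc.1.symm)]
      unfold pvAdjStep
      rw [hg0, hg1, pv_getD_setD _ b w _ [] hb0 hw0, h1, PySem.List.length_pySetD,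
        pv_getD_setD _ a w _ [] ha0 hw0]
      by_cases hwb : w = b
      · rw [if_pos ⟨hwb, by rw [hlen]; omega⟩, if_pos hwb]
      · rw [if_neg (by tauto), if_neg hwb]
        by_cases hwa : w = a
        · rw [if_pos ⟨hwa, by rw [hlen]; omega⟩, if_pos hwa]
        · rw [if_neg (by tauto), if_neg hwa]
    rw [List.foldl_cons, ih hsh' (pvAdjStep acc e) u x (by
        unfold pvAdjStep
        rw [PySem.List.length_pySetD, PySem.List.length_pySetD, hlen]) hu0 hun,
      hstep u hu0 hun, List.countP_cons]
    have hcnt : List.count x (if u = b then PySem.List.pyGetD acc b [] ++ [a]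
          else if u = a then PySem.List.pyGetD acc a [] ++ [b]
          else PySem.List.pyGetD acc u [])
        = List.count x (PySem.List.pyGetD acc u [])
          + (if (a == u && b == x) || (a == x && b == u) then 1 else 0) := by
      by_cases hub : u = b
      · rw [if_pos hub, hub, List.count_append]
        congr 1
        by_cases hax : a = x <;> simp [hax, List.count_cons, hab, beq_iff_eq] <;> omega
      · by_cases hua : u = a
        · rw [if_neg hub, if_pos hua, hua, List.count_append]
          congr 1
          by_cases hbx : b = x <;>
            simp [hbx, List.count_cons, (by omega : ¬ b = a), beq_iff_eq] <;> omega
        · rw [if_neg hub, if_neg hua]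
          have : ¬ ((a == u && b == x) || (a == x && b == u)) = true := by
            simp only [Bool.or_eq_true, Bool.and_eq_true, beq_iff_eq]
            rintro (⟨h1, _⟩ | ⟨_, h2⟩)
            exacts [hua h1.symm, hub h2.symm]
          rw [if_neg this]; omega
    rw [hcnt, ← hadef, ← hbdef]
    omega

theorem pv_lookup_none (l : List (Int × Int × Int × Int)) (u : Int)
    (h : u ∉ l.map (·.1)) : (l.map (fun t => (t.1, t.2.1))).lookup u = none := by
  induction l with
  | nil => rfl
  | cons t l ih =>
    rw [List.map_cons] at h ⊢
    have hne : (u == t.1) = false := by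
      simp only [beq_eq_false_iff_ne, ne_eq]
      intro hc; exact h (by simp [hc])
    rw [List.lookup_cons, hne]
    exact ih (fun hc => h (by simp [hc]))

theorem pv_lookup_some (l : List (Int × Int × Int × Int)) (u : Int)
    (h : u ∈ l.map (·.1)) : ∃ y, (l.map (fun t => (t.1, t.2.1))).lookup u = some y := by
  induction l with
  | nil => simp at h
  | cons t l ih =>
    rw [List.map_cons, List.lookup_cons]
    by_cases hu : u = t.1
    · have hbe : (u == t.1) = true := by simp [hu]
      rw [hbe]; exact ⟨t.2.1, rfl⟩
    · have hbe : (u == t.1) = false := by simp [hu]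
      rw [hbe]
      rw [List.map_cons, List.mem_cons] at h
      exact ih (h.resolve_left hu)

set_option maxHeartbeats 1000000 in
theorem pv_cert_tf (n : Int) (edges : List (List Int)) (seq : List (Int × Int × Int × Int))
    (hn : 2 ≤ n)
    (hsh : ∀ e ∈ edges, e.length = 2 ∧ 0 ≤ e.getD 0 0 ∧ e.getD 0 0 < n ∧ 0 ≤ e.getD 1 0
        ∧ e.getD 1 0 < n ∧ e.getD 0 0 ≠ e.getD 1 0)
    (hc : pvCertOK n edges seq = true) :
    PvTF n
      (edges.foldl (fun a e =>
        let u := PySem.List.pyGetD e 0 0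
        let v := PySem.List.pyGetD e 1 0
        let a1 := PySem.List.pySetD a u (PySem.List.pyGetD a u [] ++ [v])
        PySem.List.pySetD a1 v (PySem.List.pyGetD a1 v [] ++ [u]))
        (List.replicate n.toNat ([] : List Int)))
      (pvPi seq) (pvRk seq)
    ∧ (∀ e ∈ edges, ∃ v, (1 ≤ v ∧ v < n) ∧ pvConn e v (pvPi seq v))
    ∧ (∀ v : Int, 1 ≤ v → v < n → ∃ e ∈ edges, pvConn e v (pvPi seq v)) := by
  have hcast : ((n.toNat : Nat) : Int) = n := Int.toNat_of_nonneg (by omega)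
  unfold pvCertOK at hc
  simp only [Bool.and_eq_true, List.all_eq_true, decide_eq_true_eq] at hc
  obtain ⟨⟨⟨⟨hnd, hcov⟩, hrng⟩, hent⟩, hperm⟩ := hc
  have hcov' : ∀ v : Int, 1 ≤ v → v < n → v ∈ seq.map (·.1) := by
    intro v h1 h2
    have := hcov v (by rw [PySem.List.mem_pyRange_one]; exact ⟨h1, h2⟩)
    simpa using this
  have hrng' : ∀ v ∈ seq.map (·.1), 1 ≤ v ∧ v < n := by
    intro v hv
    have := hrng v hv
    simp only [Bool.and_eq_true, decide_eq_true_eq] at this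
    exact this
  have hentry : ∀ (k : Nat) (hk : k < seq.length),
      (0 ≤ seq[k].2.1 ∧ seq[k].2.1 < n) ∧ seq[k].2.1 ≠ seq[k].1
      ∧ (seq[k].2.1 = 0 ∨ seq[k].2.1 ∈ (seq.map (·.1)).drop (k+1))
      ∧ ((seq[k].2.2.1 = seq[k].1 ∧ seq[k].2.2.2 = seq[k].2.1)
          ∨ (seq[k].2.2.1 = seq[k].2.1 ∧ seq[k].2.2.2 = seq[k].1)) := by
    intro k hk
    have h := hent k (List.mem_range.mpr hk)
    rw [List.getElem?_eq_getElem hk] at h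
    rcases hsk : seq[k] with ⟨v, p, a, b⟩
    rw [hsk] at h
    simp only [Bool.and_eq_true, Bool.or_eq_true, decide_eq_true_eq, beq_iff_eq,
      bne_iff_ne, ne_eq, List.contains_iff_mem] at h
    obtain ⟨⟨⟨hp, hpv⟩, hdrop⟩, hor⟩ := h
    exact ⟨hp, hpv, hdrop, hor⟩
  have hperm2 : (pvEdgePairs edges).Perm (seq.map (fun t => (t.2.2.1, t.2.2.2))) :=
    Multiset.coe_eq_coe.mp hperm
  -- lookup value at the k-th entry
  have hlk : ∀ (k : Nat) (hk : k < seq.length), pvPi seq (seq[k].1) = seq[k].2.1 := by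
    intro k hk
    have hmem : seq[k].1 ∈ seq.map (·.1) := by
      exact List.mem_map_of_mem (List.getElem_mem hk)
    obtain ⟨y, hy⟩ := pv_lookup_some seq (seq[k].1) hmem
    have hcnt := pv_lookup_countP seq hnd (seq[k].1) y
    rw [hy, if_pos rfl] at hcnt
    have : ∃ t ∈ seq, (t.1 == seq[k].1 && t.2.1 == y) = true := by
      by_contra hcon
      push_neg at hcon
      rw [List.countP_eq_zero.mpr (fun t ht => by
        intro hq; exact absurd hq (hcon t ht))] at hcnt
      omega
    obtain ⟨t, htmem, htq⟩ := this
    simp only [Bool.and_eq_true, beq_iff_eq] at htq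
    obtain ⟨j, hj, hjt⟩ := List.getElem_of_mem htmem
    have hjlen : j < (seq.map (·.1)).length := by simpa using hj
    have hklen : k < (seq.map (·.1)).length := by simpa using hk
    have h1 : (seq.map (·.1))[j]'hjlen = (seq.map (·.1))[k]'hklen := by
      rw [List.getElem_map, List.getElem_map, hjt]
      exact htq.1
    have hjk : j = k := (List.Nodup.getElem_inj_iff hnd).mp h1
    subst hjk
    rw [pvPi, hy, Option.getD_some, hjt, htq.2]
  have hpiz : pvPi seq 0 = -1 := by
    rw [pvPi, pv_lookup_none seq 0 (fun h => by have := hrng' 0 h; omega), Option.getD_none]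
  have hout : ∀ v : Int, ¬(1 ≤ v ∧ v < n) → pvPi seq v = -1 := by
    intro v hv
    rw [pvPi, pv_lookup_none seq v (fun h => hv (hrng' v h)), Option.getD_none]
  have hmemk : ∀ v : Int, 1 ≤ v → v < n → ∃ (k : Nat) (hk : k < seq.length), seq[k].1 = v := by
    intro v h1 h2
    obtain ⟨t, ht, htv⟩ := List.mem_map.mp (hcov' v h1 h2)
    obtain ⟨k, hk, hkt⟩ := List.getElem_of_mem ht
    exact ⟨k, hk, by rw [hkt]; exact htv⟩
  have hrange : ∀ v : Int, 1 ≤ v → v < n → 0 ≤ pvPi seq v ∧ pvPi seq v < n := by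
    intro v h1 h2
    obtain ⟨k, hk, hkv⟩ := hmemk v h1 h2
    rw [← hkv, hlk k hk]
    exact (hentry k hk).1
  have hrkk : ∀ (k : Nat) (hk : k < seq.length), pvRk seq (seq[k].1) = k := by
    intro k hk
    have := List.Nodup.idxOf_getElem hnd k (by simpa using hk)
    rw [List.getElem_map] at this
    rw [pvRk, pvFsts, this]
  have hseqlen : seq.length ≤ (n - 1).toNat := by
    have := pv_nodup_len_le (seq.map (·.1)) (PySem.List.pyRange 1 n 1) hnd (fun x hx => by
      rw [PySem.List.mem_pyRange_one]; exact ⟨(hrng' x hx).1, (hrng' x hx).2⟩)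
    rw [PySem.List.length_pyRange_one] at this
    simpa using this
  have hrk : ∀ v : Int, 1 ≤ v → v < n → pvRk seq v < pvRk seq (pvPi seq v) := by
    intro v h1 h2
    obtain ⟨k, hk, hkv⟩ := hmemk v h1 h2
    rw [← hkv, hlk k hk, hrkk k hk]
    rcases (hentry k hk).2.2.1 with h0 | hdr
    · rw [h0]
      have h0f : (0 : Int) ∉ seq.map (·.1) := fun h => by have := hrng' 0 h; omega
      rw [pvRk, pvFsts, List.idxOf_eq_length_iff.mpr h0f]
      simpa using hk
    · exact Nat.lt_of_lt_of_le (Nat.lt_succ_self k)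
        (pv_idxOf_drop_le (seq.map (·.1)) hnd seq[k].2.1 (k+1) hdr)
  have hrkb : ∀ v : Int, 1 ≤ v → v < n → pvRk seq v < n.toNat := by
    intro v h1 h2
    obtain ⟨k, hk, hkv⟩ := hmemk v h1 h2
    rw [← hkv, hrkk k hk]
    omega
  refine ⟨⟨hn, ?_, hpiz, hout, hrange, hrk, hrkb, ?_⟩, ?_, ?_⟩
  · show (edges.foldl _ (List.replicate n.toNat ([] : List Int))).length = n.toNat
    rw [show (fun (a : List (List Int)) (e : List Int) =>
        let u := PySem.List.pyGetD e 0 0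
        let v := PySem.List.pyGetD e 1 0
        let a1 := PySem.List.pySetD a u (PySem.List.pyGetD a u [] ++ [v])
        PySem.List.pySetD a1 v (PySem.List.pyGetD a1 v [] ++ [u])) = pvAdjStep from rfl,
      pv_adjfold_len]
    simp
  · intro u x hu0 hun
    rw [show (fun (a : List (List Int)) (e : List Int) =>
        let u := PySem.List.pyGetD e 0 0
        let v := PySem.List.pyGetD e 1 0
        let a1 := PySem.List.pySetD a u (PySem.List.pyGetD a u [] ++ [v])
        PySem.List.pySetD a1 v (PySem.List.pyGetD a1 v [] ++ [u])) = pvAdjStep from rfl,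
      pv_adjfold_count n edges hsh (List.replicate n.toNat []) u x (by simp) hu0 hun]
    have hrow0 : PySem.List.pyGetD (List.replicate n.toNat ([] : List Int)) u [] = [] := by
      rw [pv_getD_replicate _ _ _ _ hu0]
      split_ifs <;> rfl
    rw [hrow0]
    simp only [List.count_nil, Nat.zero_add]
    have e1 : edges.countP (fun e => (e.getD 0 0 == u && e.getD 1 0 == x)
          || (e.getD 0 0 == x && e.getD 1 0 == u))
        = (pvEdgePairs edges).countP (fun q => (q.1 == u && q.2 == x)
          || (q.1 == x && q.2 == u)) := by
      rw [pvEdgePairs, List.countP_map]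
      rfl
    have e2 : (pvEdgePairs edges).countP (fun q => (q.1 == u && q.2 == x)
          || (q.1 == x && q.2 == u))
        = seq.countP (fun t => (t.2.2.1 == u && t.2.2.2 == x)
          || (t.2.2.1 == x && t.2.2.2 == u)) := by
      rw [hperm2.countP_eq, List.countP_map]
      rfl
    have e3 : seq.countP (fun t => (t.2.2.1 == u && t.2.2.2 == x)
          || (t.2.2.1 == x && t.2.2.2 == u))
        = seq.countP (fun t => (t.1 == u && t.2.1 == x) || (t.1 == x && t.2.1 == u)) := by
      apply List.countP_congr
      intro t ht
      obtain ⟨k, hk, hkt⟩ := List.getElem_of_mem ht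
      have he := hentry k hk
      rw [hkt] at he
      rcases he.2.2.2 with ⟨ha, hb⟩ | ⟨ha, hb⟩
      · rw [ha, hb]
      · rw [ha, hb, Bool.or_comm, Bool.and_comm (t.2.1 == x), Bool.and_comm (t.2.1 == u)]
    rw [e1, e2, e3, pv_countP_or seq _ _ (by
      intro t ht
      rintro ⟨h1, h2⟩
      simp only [Bool.and_eq_true, beq_iff_eq] at h1 h2
      obtain ⟨k, hk, hkt⟩ := List.getElem_of_mem ht
      have he := hentry k hk
      rw [hkt] at he
      exact he.2.1 (by rw [h1.2, ← h2.1, h1.1, ← h2.2])),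
      pv_lookup_countP seq hnd u x, pv_lookup_countP seq hnd x u]
    congr 1
    · by_cases hu1 : 1 ≤ u
      · have hmem := hcov' u hu1 hun
        obtain ⟨y, hy⟩ := pv_lookup_some seq u hmem
        have hpiu : pvPi seq u = y := by rw [pvPi, hy, Option.getD_some]
        rw [hy]
        by_cases hyx : y = x
        · rw [if_pos (by rw [hyx]), if_pos ⟨hu1, by rw [hpiu, hyx]⟩]
        · rw [if_neg (by simpa using hyx), if_neg (by rw [hpiu]; tauto)]
      · have hu0' : u = 0 := by omega
        rw [pv_lookup_none seq u (fun h => by have := hrng' u h; omega)]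
        rw [if_neg (by simp), if_neg (by tauto)]
    · by_cases hxf : x ∈ seq.map (·.1)
      · obtain ⟨y, hy⟩ := pv_lookup_some seq x hxf
        have hpix : pvPi seq x = y := by rw [pvPi, hy, Option.getD_some]
        rw [hy, hpix]
        by_cases hyu : y = u
        · rw [if_pos (by rw [hyu]), if_pos hyu]
        · rw [if_neg (by simpa using hyu), if_neg hyu]
      · rw [pv_lookup_none seq x hxf]
        have hpix : pvPi seq x = -1 := by
          rw [pvPi, pv_lookup_none seq x hxf, Option.getD_none]
        rw [if_neg (by simp), if_neg (by rw [hpix]; omega)]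
  · -- every input edge joins some nonroot node to its parent
    intro e he
    have hpair : (e.getD 0 0, e.getD 1 0) ∈ pvEdgePairs edges := by
      rw [pvEdgePairs]
      exact List.mem_map_of_mem he
    have hmem2 := hperm2.mem_iff.mp hpair
    obtain ⟨t, ht, hte⟩ := List.mem_map.mp hmem2
    obtain ⟨k, hk, hkt⟩ := List.getElem_of_mem ht
    rw [← hkt] at hte
    have he' := hentry k hk
    have hv := hrng' seq[k].1 (List.mem_map_of_mem (List.getElem_mem hk))
    refine ⟨seq[k].1, hv, ?_⟩
    have hpik := hlk k hk
    have he0 : e.getD 0 0 = seq[k].2.2.1 := (congrArg Prod.fst hte).symm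
    have he1 : e.getD 1 0 = seq[k].2.2.2 := (congrArg Prod.snd hte).symm
    rcases he'.2.2.2 with ⟨ha, hb⟩ | ⟨ha, hb⟩
    · exact Or.inl ⟨by rw [he0, ha], by rw [he1, hb, hpik]⟩
    · exact Or.inr ⟨by rw [he0, ha, hpik], by rw [he1, hb]⟩
  · -- every nonroot node has its parent edge among the input edges
    intro v h1 h2
    obtain ⟨k, hk, hkv⟩ := hmemk v h1 h2
    have hpairmem : (seq[k].2.2.1, seq[k].2.2.2) ∈ seq.map (fun t => (t.2.2.1, t.2.2.2)) :=
      List.mem_map_of_mem (List.getElem_mem hk)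
    have hmem2 := hperm2.symm.mem_iff.mp hpairmem
    rw [pvEdgePairs] at hmem2
    obtain ⟨e, he, hee⟩ := List.mem_map.mp hmem2
    refine ⟨e, he, ?_⟩
    have he0 : e.getD 0 0 = seq[k].2.2.1 := congrArg Prod.fst hee
    have he1 : e.getD 1 0 = seq[k].2.2.2 := congrArg Prod.snd hee
    have hpik := hlk k hk
    rw [hkv] at hpik
    rcases (hentry k hk).2.2.2 with ⟨ha, hb⟩ | ⟨ha, hb⟩
    · exact Or.inl ⟨by rw [he0, ha, hkv], by rw [he1, hb, hpik]⟩
    · exact Or.inr ⟨by rw [he0, ha, hpik], by rw [he1, hb, hkv]⟩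

theorem pv_dfs (n : Int) (adj : List (List Int)) (pi : Int → Int) (rk : Int → Nat)
    (tf : PvTF n adj pi rk) :
    ∃ order : List Int,
      dfsLoopA adj (n.toNat + 1) ([0], List.replicate n.toNat (-1 : Int), [])
        = ([], pvParArr n pi, order)
      ∧ order.Nodup ∧ (∀ v : Int, v ∈ order ↔ 0 ≤ v ∧ v < n)
      ∧ (∀ v ∈ order, v ≠ 0 → order.idxOf (pi v) < order.idxOf v) := by
  obtain ⟨par', order', hrun, hinv⟩ := pv_runA n adj pi rk tf (n.toNat + 1)
    [0] (List.replicate n.toNat (-1 : Int)) []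
    (pv_inv_init n pi tf.hn2 tf.hpiz tf.hout) (by simp)
  obtain ⟨hp, hnd, hmem, hord⟩ := pv_inv_final n adj pi rk tf par' order' hinv
  exact ⟨order', by rw [hrun, hp], hnd, hmem, hord⟩

-- ---- counting-matrix helpers ----

def pvG2 (M : List (List Int)) (v g : Int) : Int :=
  PySem.List.pyGetD (PySem.List.pyGetD M v []) g 0

theorem pv_g2_upd (M : List (List Int)) (u g x : Int) (hu0 : 0 ≤ u) (hg0 : 0 ≤ g)
    (hul : u < (M.length : Int)) (hgl : g < ((PySem.List.pyGetD M u []).length : Int)) :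
    ∀ w h : Int, 0 ≤ w → 0 ≤ h →
      pvG2 (PySem.List.pySetD M u (PySem.List.pySetD (PySem.List.pyGetD M u []) g x)) w h
        = if w = u ∧ h = g then x else pvG2 M w h := by
  intro w h hw0 hh0
  unfold pvG2
  rw [pv_getD_setD M u w _ [] hu0 hw0]
  by_cases hwu : w = u
  · rw [if_pos ⟨hwu, hul⟩, pv_getD_setD _ g h x 0 hg0 hh0]
    by_cases hhg : h = g
    · rw [if_pos ⟨hhg, hgl⟩, if_pos ⟨hwu, hhg⟩]
    · rw [if_neg (by tauto), if_neg (by tauto), hwu]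
  · rw [if_neg (by tauto), if_neg (by tauto)]

theorem pv_rowlen_upd (M : List (List Int)) (u : Int) (r : List Int) (hu0 : 0 ≤ u)
    (w : Int) (hw0 : 0 ≤ w) (hr : r.length = (PySem.List.pyGetD M u []).length) :
    (PySem.List.pyGetD (PySem.List.pySetD M u r) w []).length
      = (PySem.List.pyGetD M w []).length := by
  rw [pv_getD_setD M u w r [] hu0 hw0]
  by_cases hwu : w = u
  · by_cases hul : u < (M.length : Int)
    · rw [if_pos ⟨hwu, hul⟩, hr, hwu]
    · rw [if_neg (by tauto)]
  · rw [if_neg (by tauto)]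

theorem pv_parr_get (n : Int) (pi : Int → Int) (u d : Int) (hn0 : 0 ≤ n)
    (hu0 : 0 ≤ u) (hun : u < n) :
    PySem.List.pyGetD (pvParArr n pi) u d = if u = 0 then -1 else pi u := by
  rw [pvParArr, pv_getD_rangemap _ _ _ _ hu0,
    if_pos (by rw [Int.toNat_of_nonneg hn0]; exact hun)]
  rw [Int.toNat_of_nonneg hu0]

theorem pv_kidsList_count (n : Int) (pi : Int → Int)
    (hdom : ∀ x : Int, ¬(1 ≤ x ∧ x < n) → pi x = -1) (u x : Int) (hu0 : 0 ≤ u) :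
    (pvKidsList n pi u).count x = if pi x = u then 1 else 0 := by
  rw [pvKidsList]
  by_cases hp : pi x = u
  · have hx : 1 ≤ x ∧ x < n := by
      by_contra hc
      rw [hdom x hc] at hp
      omega
    rw [if_pos hp, List.count_filter (by simpa using hp),
      List.count_eq_one_of_mem (PySem.List.nodup_pyRange_one 1 n)
        (by rw [PySem.List.mem_pyRange_one]; exact hx)]
  · rw [if_neg hp, List.count_eq_zero.mpr]
    intro hm
    exact hp (by simpa using (List.of_mem_filter hm))

theorem pv_sum_filter_split (l : List Int) (f : Int → Int) (p q r : Int → Bool)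
    (h : ∀ v ∈ l, (p v = true ↔ (q v || r v) = true) ∧ ¬(q v = true ∧ r v = true)) :
    ((l.filter p).map f).sum = ((l.filter q).map f).sum + ((l.filter r).map f).sum := by
  induction l with
  | nil => simp
  | cons v l ih =>
    have hv := h v (by simp)
    have ih' := ih (fun w hw => h w (by simp [hw]))
    rw [List.filter_cons, List.filter_cons, List.filter_cons]
    cases hq : q v <;> cases hr : r v
    · have hp : p v = false := by
        cases hpv : p v
        · rfl
        · exact absurd (hv.1.mp hpv) (by simp [hq, hr])
      rw [if_neg (by simp [hp]), if_neg (by simp), if_neg (by simp), ih']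
    · have hp : p v = true := hv.1.mpr (by simp [hr])
      rw [if_pos hp, if_neg (by simp), if_pos rfl, List.map_cons, List.sum_cons,
        List.map_cons, List.sum_cons, ih']
      ring
    · have hp : p v = true := hv.1.mpr (by simp [hq])
      rw [if_pos hp, if_pos rfl, if_neg (by simp), List.map_cons, List.sum_cons,
        List.map_cons, List.sum_cons, ih']
      ring
    · exact absurd ⟨hq, hr⟩ hv.2

theorem pv_order_len (n : Int) (order : List Int) (hn2 : 2 ≤ n) (hnd : order.Nodup)
    (hmem : ∀ v : Int, v ∈ order ↔ 0 ≤ v ∧ v < n) : order.length = n.toNat := by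
  have hperm : order.Perm (PySem.List.pyRange 0 n 1) := by
    rw [List.perm_iff_count]
    intro a
    by_cases ha : 0 ≤ a ∧ a < n
    · rw [List.count_eq_one_of_mem hnd ((hmem a).mpr ha),
        List.count_eq_one_of_mem (PySem.List.nodup_pyRange_one 0 n)
          (by rw [PySem.List.mem_pyRange_one]; exact ha)]
    · rw [List.count_eq_zero.mpr (fun h => ha ((hmem a).mp h)),
        List.count_eq_zero.mpr (fun h => ha (by
          rw [PySem.List.mem_pyRange_one] at h; exact h))]
  have := hperm.length_eq
  rw [PySem.List.length_pyRange_one] at this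
  simpa using this

theorem pv_S_nonneg (n : Int) (pi : Int → Int) (group : List Int) (v g : Int) :
    0 ≤ pvS n pi group v g := by
  unfold pvS
  positivity

theorem pv_gfold (n : Int) (pi : Int → Int) (group gc : List Int) (src dst : Int)
    (hne : src ≠ dst) (hsrc0 : 0 ≤ src) (hdst0 : 0 ≤ dst) :
    ∀ (gs : List Int) (M : List (List Int)) (t : Int),
      (∀ g ∈ gs, 1 ≤ g ∧ g < 21) → gs.Nodup →
      dst < (M.length : Int) →
      (∀ g ∈ gs, g < ((PySem.List.pyGetD M dst []).length : Int)) →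
      (∀ g ∈ gs, pvG2 M src g = pvS n pi group src g) →
      ∃ M', (gs.foldl (fun (s3 : List (List Int) × Int) g =>
          let cnt := PySem.List.pyGetD (PySem.List.pyGetD s3.1 src []) g 0
          if cnt > 0 then
            (PySem.List.pySetD s3.1 dst (PySem.List.pySetD (PySem.List.pyGetD s3.1 dst []) g
               (PySem.List.pyGetD (PySem.List.pyGetD s3.1 dst []) g 0 + cnt)),
             s3.2 + cnt * (PySem.List.pyGetD gc g 0 - cnt))
          else s3) (M, t))
        = (M', t + (gs.map (fun g => pvS n pi group src g
            * (PySem.List.pyGetD gc g 0 - pvS n pi group src g))).sum)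
        ∧ M'.length = M.length
        ∧ (∀ w : Int, 0 ≤ w → w ≠ dst → PySem.List.pyGetD M' w [] = PySem.List.pyGetD M w [])
        ∧ (PySem.List.pyGetD M' dst []).length = (PySem.List.pyGetD M dst []).length
        ∧ (∀ h : Int, 0 ≤ h → pvG2 M' dst h
            = pvG2 M dst h + (if h ∈ gs then pvS n pi group src h else 0)) := by
  intro gs
  induction gs with
  | nil =>
    intro M t _ _ _ _ _
    exact ⟨M, by simp, rfl, fun _ _ _ => rfl, rfl, fun h _ => by simp⟩
  | cons g gs ih =>
    intro M t hgr hnd hdl hrl hrow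
    have hg := hgr g (by simp)
    have hcnt : PySem.List.pyGetD (PySem.List.pyGetD M src []) g 0
        = pvS n pi group src g := hrow g (by simp)
    rw [List.nodup_cons] at hnd
    rw [List.foldl_cons]
    by_cases hpos : PySem.List.pyGetD (PySem.List.pyGetD M src []) g 0 > 0
    · rw [if_pos hpos]
      set M1 := PySem.List.pySetD M dst (PySem.List.pySetD (PySem.List.pyGetD M dst []) g
          (PySem.List.pyGetD (PySem.List.pyGetD M dst []) g 0
            + PySem.List.pyGetD (PySem.List.pyGetD M src []) g 0)) with hM1
      have hlen1 : M1.length = M.length := PySem.List.length_pySetD _ _ _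
      have hoth1 : ∀ w : Int, 0 ≤ w → w ≠ dst →
          PySem.List.pyGetD M1 w [] = PySem.List.pyGetD M w [] := by
        intro w hw0 hwd
        rw [hM1, pv_getD_setD M dst w _ [] hdst0 hw0, if_neg (by tauto)]
      have hrl1 : (PySem.List.pyGetD M1 dst []).length
          = (PySem.List.pyGetD M dst []).length := by
        rw [hM1]
        exact pv_rowlen_upd M dst _ hdst0 dst hdst0 (PySem.List.length_pySetD _ _ _)
      have hval1 : ∀ h : Int, 0 ≤ h → pvG2 M1 dst h
          = pvG2 M dst h + (if h = g then pvS n pi group src h else 0) := by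
        intro h hh0
        rw [hM1, pv_g2_upd M dst g _ hdst0 (by omega) hdl (hrl g (by simp)) dst h
          (by omega) hh0]
        by_cases hhg : h = g
        · rw [if_pos ⟨rfl, hhg⟩, if_pos hhg, hhg, hcnt]
          rfl
        · rw [if_neg (by tauto), if_neg hhg]
          ring
      obtain ⟨M', hfold, hlen, hoth, hrlen, hval⟩ := ih M1
        (t + PySem.List.pyGetD (PySem.List.pyGetD M src []) g 0
          * (PySem.List.pyGetD gc g 0 - PySem.List.pyGetD (PySem.List.pyGetD M src []) g 0))
        (fun g' hg' => hgr g' (by simp [hg'])) hnd.2 (by omega)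
        (fun g' hg' => by rw [hrl1]; exact hrl g' (by simp [hg']))
        (fun g' hg' => by
          unfold pvG2
          rw [hoth1 src hsrc0 hne]
          exact hrow g' (by simp [hg']))
      refine ⟨M', ?_, by omega, ?_, by rw [hrlen, hrl1], ?_⟩
      · rw [hfold, hcnt, List.map_cons, List.sum_cons]
        ring_nf
      · intro w hw0 hwd
        rw [hoth w hw0 hwd, hoth1 w hw0 hwd]
      · intro h hh0
        rw [hval h hh0, hval1 h hh0]
        by_cases hhg : h = g
        · subst hhg
          rw [if_neg hnd.1, if_pos rfl, if_pos List.mem_cons_self]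
          ring
        · rw [if_neg hhg]
          have hmemiff : (h ∈ g :: gs) ↔ h ∈ gs := by simp [hhg]
          by_cases hgs : h ∈ gs
          · rw [if_pos hgs, if_pos (hmemiff.mpr hgs)]
            ring
          · rw [if_neg hgs, if_neg (fun hm => hgs (hmemiff.mp hm))]
            ring
    · rw [if_neg hpos]
      have hz : pvS n pi group src g = 0 := by
        have := pv_S_nonneg n pi group src g
        omega
      obtain ⟨M', hfold, hlen, hoth, hrlen, hval⟩ := ih M t
        (fun g' hg' => hgr g' (by simp [hg'])) hnd.2 hdl
        (fun g' hg' => hrl g' (by simp [hg'])) (fun g' hg' => hrow g' (by simp [hg']))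
      refine ⟨M', ?_, hlen, hoth, hrlen, ?_⟩
      · rw [hfold, List.map_cons, List.sum_cons, hz]
        ring_nf
      · intro h hh0
        rw [hval h hh0]
        by_cases hhg : h = g
        · subst hhg
          rw [if_neg hnd.1, if_pos List.mem_cons_self, hz]
        · by_cases hgs : h ∈ gs
          · rw [if_pos hgs, if_pos (by simp [hgs])]
          · rw [if_neg hgs, if_neg (by simp [hhg, hgs])]

theorem pv_vfold (n : Int) (pi : Int → Int) (group gc : List Int) (u puv : Int)
    (hu0 : 0 ≤ u) :
    ∀ (L : List Int) (M : List (List Int)) (t : Int),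
      (∀ v ∈ L, (0 ≤ v ∧ v < n) ∧ v ≠ u) →
      (∀ v ∈ L, v ≠ puv → ∀ g : Int, 1 ≤ g → g < 21 → pvG2 M v g = pvS n pi group v g) →
      u < (M.length : Int) →
      ((PySem.List.pyGetD M u []).length : Int) = 21 →
      ∃ M', (L.foldl (fun (s2 : List (List Int) × Int) v =>
          if v = puv then s2
          else (PySem.List.pyRange 1 21 1).foldl (fun (s3 : List (List Int) × Int) g =>
            let cnt := PySem.List.pyGetD (PySem.List.pyGetD s3.1 v []) g 0
            if cnt > 0 then
              (PySem.List.pySetD s3.1 u (PySem.List.pySetD (PySem.List.pyGetD s3.1 u []) g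
                 (PySem.List.pyGetD (PySem.List.pyGetD s3.1 u []) g 0 + cnt)),
               s3.2 + cnt * (PySem.List.pyGetD gc g 0 - cnt))
            else s3) s2) (M, t))
        = (M', t + ((L.filter (fun v => decide (v ≠ puv))).map (pvTerm n pi group gc)).sum)
        ∧ M'.length = M.length
        ∧ (∀ w : Int, 0 ≤ w → w ≠ u → PySem.List.pyGetD M' w [] = PySem.List.pyGetD M w [])
        ∧ (PySem.List.pyGetD M' u []).length = (PySem.List.pyGetD M u []).length
        ∧ (∀ h : Int, 0 ≤ h → pvG2 M' u h = pvG2 M u h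
            + (if 1 ≤ h ∧ h < 21
                then ((L.filter (fun v => decide (v ≠ puv))).map
                    (fun v => pvS n pi group v h)).sum
                else 0)) := by
  intro L
  induction L with
  | nil =>
    intro M t _ _ _ _
    refine ⟨M, by simp, rfl, fun _ _ _ => rfl, rfl, fun h _ => by
      rw [List.filter_nil, List.map_nil, List.sum_nil]
      split_ifs <;> ring⟩
  | cons v L ih =>
    intro M t hL hrows hul hurl
    rw [List.foldl_cons, List.filter_cons]
    by_cases hvp : v = puv
    · rw [if_pos hvp, if_neg (by simp [hvp])]
      exact ih M t (fun w hw => hL w (by simp [hw]))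
        (fun w hw => hrows w (by simp [hw])) hul hurl
    · rw [if_neg hvp, if_pos (by simpa using hvp)]
      have hv := hL v (by simp)
      obtain ⟨M1, hfold1, hlen1, hoth1, hrl1, hval1⟩ :=
        pv_gfold n pi group gc v u hv.2 hv.1.1 hu0 (PySem.List.pyRange 1 21 1) M t
          (fun g hg => by rw [PySem.List.mem_pyRange_one] at hg; omega)
          (PySem.List.nodup_pyRange_one 1 21) hul
          (fun g hg => by rw [PySem.List.mem_pyRange_one] at hg; omega)
          (fun g hg => by
            rw [PySem.List.mem_pyRange_one] at hg
            exact hrows v (by simp) hvp g hg.1 hg.2)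
      rw [hfold1]
      obtain ⟨M', hfold, hlen, hoth, hrlen, hval⟩ := ih M1 _
        (fun w hw => hL w (by simp [hw]))
        (fun w hw hwp g hg1 hg2 => by
          unfold pvG2
          rw [hoth1 w (hL w (by simp [hw])).1.1 (hL w (by simp [hw])).2]
          exact hrows w (by simp [hw]) hwp g hg1 hg2)
        (by omega) (by rw [hrl1]; exact hurl)
      rw [hfold]
      refine ⟨M', ?_, by omega, ?_, by rw [hrlen, hrl1], ?_⟩
      · rw [List.map_cons, List.sum_cons]
        congr 1
        show t + pvTerm n pi group gc v
            + ((L.filter (fun v => decide (v ≠ puv))).map (pvTerm n pi group gc)).sum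
          = t + (pvTerm n pi group gc v
            + ((L.filter (fun v => decide (v ≠ puv))).map (pvTerm n pi group gc)).sum)
        ring
      · intro w hw0 hwu
        rw [hoth w hw0 hwu, hoth1 w hw0 hwu]
      · intro h hh0
        rw [hval h hh0, hval1 h hh0, List.map_cons, List.sum_cons]
        by_cases hhr : 1 ≤ h ∧ h < 21
        · rw [if_pos (by rw [PySem.List.mem_pyRange_one]; exact hhr), if_pos hhr, if_pos hhr]
          ring
        · rw [if_neg (by rw [PySem.List.mem_pyRange_one]; exact hhr), if_neg hhr, if_neg hhr]
          ring

def pvFoldA (n : Int) (pi : Int → Int) (adj : List (List Int)) (group gc order : List Int)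
    (R : List Int) : List (List Int) × Int :=
  R.foldl (fun (s : List (List Int) × Int) i =>
      let u := PySem.List.pyGetD order i 0
      let cg := PySem.List.pyGetD group u 0
      let sc := PySem.List.pySetD s.1 u (PySem.List.pySetD (PySem.List.pyGetD s.1 u []) cg
                  (PySem.List.pyGetD (PySem.List.pyGetD s.1 u []) cg 0 + 1))
      (PySem.List.pyGetD adj u []).foldl (fun (s2 : List (List Int) × Int) v =>
        if v = PySem.List.pyGetD (pvParArr n pi) u (-1) then s2
        else (PySem.List.pyRange 1 21 1).foldl (fun (s3 : List (List Int) × Int) g =>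
            let cnt := PySem.List.pyGetD (PySem.List.pyGetD s3.1 v []) g 0
            if cnt > 0 then
              (PySem.List.pySetD s3.1 u (PySem.List.pySetD (PySem.List.pyGetD s3.1 u []) g
                 (PySem.List.pyGetD (PySem.List.pyGetD s3.1 u []) g 0 + cnt)),
               s3.2 + cnt * (PySem.List.pyGetD gc g 0 - cnt))
            else s3) s2)
        (sc, s.2))
    (List.replicate n.toNat (List.replicate 21 (0 : Int)), 0)

def pvPhiA (n : Int) (pi : Int → Int) (adj : List (List Int)) (group gc order : List Int)
    (i : Nat) : Prop :=
  (pvFoldA n pi adj group gc order (PySem.List.pyRange (n-1) ((i : Int)-1) (-1))).1.length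
      = n.toNat
  ∧ (∀ w : Int, 0 ≤ w → w < n →
      ((PySem.List.pyGetD (pvFoldA n pi adj group gc order
          (PySem.List.pyRange (n-1) ((i : Int)-1) (-1))).1 w []).length : Int) = 21)
  ∧ (∀ v : Int, 0 ≤ v → v < n → i ≤ order.idxOf v → ∀ g : Int, 1 ≤ g → g < 21 →
      pvG2 (pvFoldA n pi adj group gc order
        (PySem.List.pyRange (n-1) ((i : Int)-1) (-1))).1 v g = pvS n pi group v g)
  ∧ (∀ v : Int, 0 ≤ v → v < n → order.idxOf v < i → ∀ g : Int, 0 ≤ g → g < 21 →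
      pvG2 (pvFoldA n pi adj group gc order
        (PySem.List.pyRange (n-1) ((i : Int)-1) (-1))).1 v g = 0)
  ∧ (pvFoldA n pi adj group gc order (PySem.List.pyRange (n-1) ((i : Int)-1) (-1))).2
      = (((PySem.List.pyRange 1 n 1).filter
          (fun v => decide (i ≤ order.idxOf (pi v)))).map (pvTerm n pi group gc)).sum

theorem pv_phiA_init (n : Int) (pi : Int → Int) (adj : List (List Int))
    (group gc order : List Int) (hn2 : 2 ≤ n) (hnd : order.Nodup)
    (hmem : ∀ v : Int, v ∈ order ↔ 0 ≤ v ∧ v < n)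
    (hpirange : ∀ v : Int, 1 ≤ v → v < n → 0 ≤ pi v ∧ pi v < n) :
    pvPhiA n pi adj group gc order n.toNat := by
  have hcast : ((n.toNat : Nat) : Int) = n := Int.toNat_of_nonneg (by omega)
  have hOlen : order.length = n.toNat := pv_order_len n order hn2 hnd hmem
  have hnil : PySem.List.pyRange (n-1) ((n.toNat : Int)-1) (-1) = [] :=
    PySem.List.pyRange_neg_one_eq_nil (by omega)
  have hidx : ∀ v : Int, 0 ≤ v → v < n → order.idxOf v < n.toNat := by
    intro v h0 h1
    rw [← hOlen]
    exact List.idxOf_lt_length_of_mem ((hmem v).mpr ⟨h0, h1⟩)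
  unfold pvPhiA
  rw [hnil]
  unfold pvFoldA
  rw [List.foldl_nil]
  refine ⟨by simp, ?_, ?_, ?_, ?_⟩
  · intro w hw0 hwn
    rw [pv_getD_replicate _ _ _ _ hw0, if_pos (by omega)]
    simp
  · intro v hv0 hvn hge
    exact absurd (hidx v hv0 hvn) (by omega)
  · intro v hv0 hvn _ g hg0 hgn
    unfold pvG2
    rw [pv_getD_replicate _ _ _ _ hv0, if_pos (by omega),
      pv_getD_replicate _ _ _ _ hg0, if_pos (by omega)]
  · rw [List.filter_eq_nil_iff.mpr, List.map_nil, List.sum_nil]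
    intro v hv
    rw [PySem.List.mem_pyRange_one] at hv
    simp only [decide_eq_true_eq, not_le]
    exact lt_of_lt_of_le (hidx (pi v) (hpirange v hv.1 hv.2).1 (hpirange v hv.1 hv.2).2)
      (by omega)

theorem pv_phiA_step (n : Int) (adj : List (List Int)) (pi : Int → Int) (rk : Int → Nat)
    (tf : PvTF n adj pi rk) (group gc order : List Int)
    (hgl : n ≤ (group.length : Int)) (hg : ∀ g ∈ group, 0 ≤ g ∧ g ≤ 20)
    (hnd : order.Nodup) (hmem : ∀ v : Int, v ∈ order ↔ 0 ≤ v ∧ v < n)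
    (hpos : ∀ v ∈ order, v ≠ 0 → order.idxOf (pi v) < order.idxOf v)
    (i : Nat) (hi : i < n.toNat)
    (hprev : pvPhiA n pi adj group gc order (i+1)) :
    pvPhiA n pi adj group gc order i := by
  have hn2 := tf.hn2
  have hcast : ((n.toNat : Nat) : Int) = n := Int.toNat_of_nonneg (by omega)
  have hOlen : order.length = n.toNat := pv_order_len n order hn2 hnd hmem
  have hiO : i < order.length := by omega
  obtain ⟨hP1, hP2, hP3, hP4, hP5⟩ := hprev
  have hcast1 : ((i+1 : Nat) : Int) - 1 = (i : Int) := by push_cast; ring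
  rw [hcast1] at hP1 hP2 hP3 hP4 hP5
  set stP := pvFoldA n pi adj group gc order (PySem.List.pyRange (n-1) (i : Int) (-1))
    with hstP
  set u := PySem.List.pyGetD order (i : Int) 0 with hu
  have hu_eq : u = order[i] := by
    rw [hu, PySem.List.pyGetD_eq_getElem order 0 (by positivity) (by exact_mod_cast hiO)]
    simp
  have humem : u ∈ order := by rw [hu_eq]; exact List.getElem_mem hiO
  have hurange : 0 ≤ u ∧ u < n := (hmem u).mp humem
  have huidx : order.idxOf u = i := by
    rw [hu_eq]
    exact List.Nodup.idxOf_getElem hnd i hiO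
  set cg := PySem.List.pyGetD group u 0 with hcg
  have hcgmem : cg ∈ group := by
    rw [hcg]
    exact PySem.List.pyGetD_mem group 0 (by constructor <;> omega)
  have hcgr : 0 ≤ cg ∧ cg ≤ 20 := hg cg hcgmem
  have hst : pvFoldA n pi adj group gc order (PySem.List.pyRange (n-1) ((i : Int)-1) (-1))
      = (PySem.List.pyGetD adj u []).foldl (fun (s2 : List (List Int) × Int) v =>
          if v = PySem.List.pyGetD (pvParArr n pi) u (-1) then s2
          else (PySem.List.pyRange 1 21 1).foldl (fun (s3 : List (List Int) × Int) g =>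
              let cnt := PySem.List.pyGetD (PySem.List.pyGetD s3.1 v []) g 0
              if cnt > 0 then
                (PySem.List.pySetD s3.1 u (PySem.List.pySetD (PySem.List.pyGetD s3.1 u []) g
                   (PySem.List.pyGetD (PySem.List.pyGetD s3.1 u []) g 0 + cnt)),
                 s3.2 + cnt * (PySem.List.pyGetD gc g 0 - cnt))
              else s3) s2)
          (PySem.List.pySetD stP.1 u (PySem.List.pySetD (PySem.List.pyGetD stP.1 u []) cg
              (PySem.List.pyGetD (PySem.List.pyGetD stP.1 u []) cg 0 + 1)), stP.2) := by
    rw [show PySem.List.pyRange (n-1) ((i : Int)-1) (-1)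
        = PySem.List.pyRange (n-1) (i : Int) (-1) ++ [(i : Int)] from by
      rw [PySem.List.pyRange_neg_one_eq_reverse, PySem.List.pyRange_neg_one_eq_reverse,
        show (i : Int) - 1 + 1 = (i : Int) from by ring,
        PySem.List.pyRange_one_cons (by omega : (i : Int) < n - 1 + 1), List.reverse_cons]]
    unfold pvFoldA
    rw [List.foldl_append]
    rfl
  set Mb := PySem.List.pySetD stP.1 u (PySem.List.pySetD (PySem.List.pyGetD stP.1 u []) cg
      (PySem.List.pyGetD (PySem.List.pyGetD stP.1 u []) cg 0 + 1)) with hMb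
  have hulen : u < (stP.1.length : Int) := by rw [hP1]; omega
  have hurow : ((PySem.List.pyGetD stP.1 u []).length : Int) = 21 :=
    hP2 u hurange.1 hurange.2
  have hrowu0 : ∀ h : Int, 0 ≤ h → h < 21 → pvG2 stP.1 u h = 0 := by
    intro h h0 h21
    exact hP4 u hurange.1 hurange.2 (by omega) h h0 h21
  have hMbval : ∀ w h : Int, 0 ≤ w → 0 ≤ h →
      pvG2 Mb w h = if w = u ∧ h = cg then pvG2 stP.1 u cg + 1 else pvG2 stP.1 w h := by
    intro w h hw0 hh0
    rw [hMb]
    exact pv_g2_upd stP.1 u cg _ hurange.1 (by omega) hulen (by omega) w h hw0 hh0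
  have hMblen : Mb.length = stP.1.length := PySem.List.length_pySetD _ _ _
  have hMbrows : ∀ w : Int, 0 ≤ w → w ≠ u →
      PySem.List.pyGetD Mb w [] = PySem.List.pyGetD stP.1 w [] := by
    intro w hw0 hwu
    rw [hMb, pv_getD_setD _ u w _ [] hurange.1 hw0, if_neg (by tauto)]
  have hMburow : ((PySem.List.pyGetD Mb u []).length : Int) = 21 := by
    rw [hMb, pv_rowlen_upd stP.1 u _ hurange.1 u hurange.1 (PySem.List.length_pySetD _ _ _)]
    exact hurow
  have hpuv : PySem.List.pyGetD (pvParArr n pi) u (-1) = if u = 0 then -1 else pi u :=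
    pv_parr_get n pi u (-1) (by omega) hurange.1 hurange.2
  have hkid : ∀ v ∈ PySem.List.pyGetD adj u [],
      v ≠ PySem.List.pyGetD (pvParArr n pi) u (-1) → pi v = u := by
    intro v hv hvp
    rw [hpuv] at hvp
    have hc : 0 < (PySem.List.pyGetD adj u []).count v := List.count_pos_iff.mpr hv
    rw [tf.hadj u v hurange.1 hurange.2] at hc
    by_contra hcon
    rw [if_neg hcon] at hc
    have h1 : 1 ≤ u ∧ pi u = v := by
      by_contra hc2; rw [if_neg hc2] at hc; omega
    exact hvp (by rw [if_neg (by omega), h1.2])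
  have hkidpos : ∀ v ∈ PySem.List.pyGetD adj u [],
      v ≠ PySem.List.pyGetD (pvParArr n pi) u (-1) → (1 ≤ v ∧ v < n) ∧ i + 1 ≤ order.idxOf v := by
    intro v hv hvp
    have hpiv := hkid v hv hvp
    have hvr : 1 ≤ v ∧ v < n := by
      by_contra hc
      rw [tf.hout v hc] at hpiv
      omega
    refine ⟨hvr, ?_⟩
    have := hpos v ((hmem v).mpr ⟨by omega, hvr.2⟩) (by omega)
    rw [hpiv, huidx] at this
    omega
  obtain ⟨M', hfold, hlen, hoth, hrlen, hval⟩ :=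
    pv_vfold n pi group gc u (PySem.List.pyGetD (pvParArr n pi) u (-1)) hurange.1
      (PySem.List.pyGetD adj u []) Mb stP.2
      (fun v hv => ⟨(pv_row_mem n adj pi rk tf u hurange.1 hurange.2 v hv).1,
        (pv_row_mem n adj pi rk tf u hurange.1 hurange.2 v hv).2⟩)
      (fun v hv hvp g hg1 hg21 => by
        have hk := hkidpos v hv hvp
        unfold pvG2
        rw [hMbrows v (by omega) (by
          intro hvu
          rw [hvu, huidx] at hk
          omega)]
        exact hP3 v (by omega) hk.1.2 hk.2 g hg1 hg21)
      (by rw [hMblen]; exact hulen) hMburow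
  have hkperm : ((PySem.List.pyGetD adj u []).filter
      (fun v => decide (v ≠ PySem.List.pyGetD (pvParArr n pi) u (-1)))).Perm
      (pvKidsList n pi u) := by
    rw [List.perm_iff_count]
    intro x
    rw [pv_kidsList_count n pi tf.hout u x hurange.1]
    rw [hpuv]
    exact pv_kids_count n adj pi rk tf u hurange.1 hurange.2 x
  unfold pvPhiA
  rw [hst, hfold]
  refine ⟨by rw [hlen, hMblen, hP1], ?_, ?_, ?_, ?_⟩
  · intro w hw0 hwn
    by_cases hwu : w = u
    · rw [hwu]
      rw [show ((PySem.List.pyGetD M' u []).length : Int)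
          = ((PySem.List.pyGetD Mb u []).length : Int) from by rw [hrlen]]
      exact hMburow
    · rw [hoth w hw0 hwu, hMbrows w hw0 hwu]
      exact hP2 w hw0 hwn
  · intro v hv0 hvn hge g hg1 hg21
    by_cases hvu : v = u
    · subst hvu
      rw [hval g (by omega), if_pos (show 1 ≤ g ∧ g < 21 from ⟨hg1, hg21⟩)]
      have hMbug : pvG2 Mb u g = if g = cg then (1 : Int) else 0 := by
        rw [hMbval u g hurange.1 (by omega)]
        by_cases hgc : g = cg
        · rw [if_pos ⟨rfl, hgc⟩, hrowu0 cg (by omega) (by omega), if_pos hgc]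
          ring
        · rw [if_neg (by tauto), if_neg hgc]
          exact hrowu0 g (by omega) (by omega)
      rw [hMbug, (hkperm.map (fun v => pvS n pi group v g)).sum_eq,
        pv_S_partition n adj pi rk tf group u g hurange.1 hurange.2]
      congr 1
      rw [← hcg]
      by_cases hgc : g = cg
      · rw [if_pos hgc, if_pos (by simp [hgc])]
      · rw [if_neg hgc, if_neg (by simp only [beq_iff_eq]; exact fun h => hgc h.symm)]
    · have hge' : i + 1 ≤ order.idxOf v := by
        rcases Nat.lt_or_ge (order.idxOf v) (i+1) with h | h
        · exfalso
          have : order.idxOf v = i := by omega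
          rw [← huidx] at this
          have hvm : v ∈ order := (hmem v).mpr ⟨hv0, hvn⟩
          exact hvu ((List.idxOf_inj hvm).mp this)
        · exact h
      have hrowv : pvG2 M' v g = pvG2 stP.1 v g := by
        unfold pvG2
        rw [hoth v hv0 hvu, hMbrows v hv0 hvu]
      rw [hrowv]
      exact hP3 v hv0 hvn hge' g hg1 hg21
  · intro v hv0 hvn hlt g hg0 hg21
    have hvu : v ≠ u := by
      intro hvu
      rw [hvu, huidx] at hlt
      omega
    have hrowv : pvG2 M' v g = pvG2 stP.1 v g := by
      unfold pvG2
      rw [hoth v hv0 hvu, hMbrows v hv0 hvu]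
    rw [hrowv]
    exact hP4 v hv0 hvn (by omega) g hg0 hg21
  · dsimp only
    rw [hP5]
    have hsplit := pv_sum_filter_split (PySem.List.pyRange 1 n 1) (pvTerm n pi group gc)
      (fun v => decide (i ≤ order.idxOf (pi v)))
      (fun v => decide (i + 1 ≤ order.idxOf (pi v)))
      (fun v => decide (order.idxOf (pi v) = i))
      (fun v _ => by
        constructor
        · simp only [Bool.or_eq_true, decide_eq_true_eq]
          omega
        · simp only [decide_eq_true_eq]
          omega)
    rw [hsplit]
    congr 1
    rw [show (PySem.List.pyRange 1 n 1).filter (fun v => decide (order.idxOf (pi v) = i))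
        = pvKidsList n pi u from by
      rw [pvKidsList]
      apply List.filter_congr
      intro v hv
      rw [PySem.List.mem_pyRange_one] at hv
      rw [decide_eq_decide]
      constructor
      · intro hidx
        have hpim : pi v ∈ order :=
          (hmem (pi v)).mpr ⟨(tf.hrange v hv.1 hv.2).1, (tf.hrange v hv.1 hv.2).2⟩
        rw [← huidx] at hidx
        exact (List.idxOf_inj hpim).mp hidx
      · intro hpiv
        rw [hpiv, huidx]]
    exact (hkperm.map (pvTerm n pi group gc)).sum_eq

theorem pv_phase2A (n : Int) (adj : List (List Int)) (pi : Int → Int) (rk : Int → Nat)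
    (group gc : List Int) (order : List Int)
    (tf : PvTF n adj pi rk)
    (hgl : n ≤ (group.length : Int)) (hg : ∀ g ∈ group, 0 ≤ g ∧ g ≤ 20)
    (hnd : order.Nodup) (hmem : ∀ v : Int, v ∈ order ↔ 0 ≤ v ∧ v < n)
    (hpos : ∀ v ∈ order, v ≠ 0 → order.idxOf (pi v) < order.idxOf v) :
    ((PySem.List.pyRange (n-1) (-1) (-1)).foldl (fun (s : List (List Int) × Int) i =>
      let u := PySem.List.pyGetD order i 0
      let cg := PySem.List.pyGetD group u 0
      let sc := PySem.List.pySetD s.1 u (PySem.List.pySetD (PySem.List.pyGetD s.1 u []) cg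
                  (PySem.List.pyGetD (PySem.List.pyGetD s.1 u []) cg 0 + 1))
      (PySem.List.pyGetD adj u []).foldl (fun (s2 : List (List Int) × Int) v =>
        if v = PySem.List.pyGetD (pvParArr n pi) u (-1) then s2
        else (PySem.List.pyRange 1 21 1).foldl (fun (s3 : List (List Int) × Int) g =>
            let cnt := PySem.List.pyGetD (PySem.List.pyGetD s3.1 v []) g 0
            if cnt > 0 then
              (PySem.List.pySetD s3.1 u (PySem.List.pySetD (PySem.List.pyGetD s3.1 u []) g
                 (PySem.List.pyGetD (PySem.List.pyGetD s3.1 u []) g 0 + cnt)),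
               s3.2 + cnt * (PySem.List.pyGetD gc g 0 - cnt))
            else s3) s2)
        (sc, s.2))
    (List.replicate n.toNat (List.replicate 21 (0 : Int)), 0)).2
    = pvTotal n pi group gc := by
  have main : ∀ m : Nat, m ≤ n.toNat → pvPhiA n pi adj group gc order (n.toNat - m) := by
    intro m
    induction m with
    | zero =>
      rw [Nat.sub_zero]
      intro _
      exact pv_phiA_init n pi adj group gc order tf.hn2 hnd hmem tf.hrange
    | succ m ih =>
      intro hm
      have h1 : n.toNat - m = (n.toNat - (m+1)) + 1 := by omega
      have hprev := ih (by omega)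
      rw [h1] at hprev
      exact pv_phiA_step n adj pi rk tf group gc order hgl hg hnd hmem hpos
        (n.toNat - (m+1)) (by omega) hprev
  have hfin := main n.toNat le_rfl
  rw [Nat.sub_self] at hfin
  obtain ⟨_, _, _, _, ht⟩ := hfin
  rw [show ((0 : Nat) : Int) - 1 = (-1 : Int) from by norm_num] at ht
  show (pvFoldA n pi adj group gc order (PySem.List.pyRange (n-1) (-1) (-1))).2
    = pvTotal n pi group gc
  rw [ht, List.filter_eq_self.mpr (by intro v _; simp)]
  rfl

-- ---- port B, phase 1: edge relaxation computes the parent array ----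

-- invariant: the assigned/parent pair realises the boolean "assigned" map A,
-- A is downward closed along parents, and parent agrees with pi on assigned nodes
def pvAsg (n : Int) (pi : Int → Int) (A : Int → Bool) (st : List Bool × List Int) : Prop :=
  st.1.length = n.toNat ∧
  (∀ w : Int, 0 ≤ w → w < n → PySem.List.pyGetD st.1 w false = A w) ∧
  A 0 = true ∧
  (∀ w : Int, 1 ≤ w → w < n → A w = true → A (pi w) = true) ∧
  st.2 = (List.range n.toNat).map
    (fun w : Nat => if (w : Int) ≠ 0 ∧ A (w : Int) = true then pi (w : Int) else -1)

theorem pv_relax_step (n : Int) (adj : List (List Int)) (pi : Int → Int) (rk : Int → Nat)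
    (tf : PvTF n adj pi rk) (e : List Int) (v0 : Int)
    (hv1 : 1 ≤ v0) (hvn : v0 < n) (hconn : pvConn e v0 (pi v0))
    (st : List Bool × List Int) (A : Int → Bool) (hinv : pvAsg n pi A st) :
    pvAsg n pi (fun w => if w = v0 then (A v0 || A (pi v0)) else A w) (relaxEdgeB st e) := by
  obtain ⟨hlen, hget, hA0, hclose, hpar⟩ := hinv
  have hn2 := tf.hn2
  have hcast : ((n.toNat : Nat) : Int) = n := Int.toNat_of_nonneg (by omega)
  have hp := tf.hrange v0 hv1 hvn
  have hpne : pi v0 ≠ v0 := pv_pi_ne_self n adj pi rk tf v0 (by omega) hvn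
  set A' : Int → Bool := fun w => if w = v0 then (A v0 || A (pi v0)) else A w with hA'
  have hA'v0 : A' v0 = (A v0 || A (pi v0)) := by simp [hA']
  have hA'other : ∀ w, w ≠ v0 → A' w = A w := fun w hw => by simp [hA', hw]
  have hA'0 : A' 0 = true := by rw [hA'other 0 (by omega), hA0]
  have hA'close : ∀ w, 1 ≤ w → w < n → A' w = true → A' (pi w) = true := by
    intro w h1 h2 hw
    by_cases hwv : w = v0
    · subst hwv
      rw [hA'v0] at hw
      have hApi : A (pi w) = true := by
        rcases Bool.or_eq_true_iff.mp hw with h | h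
        · exact hclose w h1 h2 h
        · exact h
      rw [hA'other (pi w) hpne, hApi]
    · rw [hA'other w hwv] at hw
      have hApi := hclose w h1 h2 hw
      by_cases hpv : pi w = v0
      · rw [hpv] at hApi ⊢
        rw [hA'v0, hApi]
        simp
      · rw [hA'other _ hpv, hApi]
  have hlen2 : st.2.length = n.toNat := by rw [hpar]; simp
  have hassign : A (pi v0) = true →
      pvAsg n pi A' (PySem.List.pySetD st.1 v0 true, PySem.List.pySetD st.2 v0 (pi v0)) := by
    intro hT
    have hA'v0T : A' v0 = true := by rw [hA'v0, hT]; simp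
    refine ⟨by rw [PySem.List.length_pySetD, hlen], ?_, hA'0, hA'close, ?_⟩
    · intro w hw0 hwn
      rw [pv_getD_setD st.1 v0 w true false (by omega) hw0]
      by_cases hwv : w = v0
      · rw [if_pos ⟨hwv, by rw [hlen]; omega⟩, hwv, hA'v0T]
      · rw [if_neg (by tauto), hget w hw0 hwn, hA'other w hwv]
    · show PySem.List.pySetD st.2 v0 (pi v0) = _
      rw [PySem.List.pySetD_of_nonneg _ _ (by omega : (0 : Int) ≤ v0), hpar]
      apply List.ext_getElem (by simp)
      intro kk h1k h2k
      have hkN : kk < n.toNat := by simpa using h2k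
      rw [List.getElem_set]
      simp only [List.getElem_map, List.getElem_range]
      by_cases hkv : v0.toNat = kk
      · have hkv' : (kk : Int) = v0 := by omega
        rw [if_pos hkv, hkv', if_pos ⟨by omega, hA'v0T⟩]
      · have hkv' : (kk : Int) ≠ v0 := by omega
        rw [if_neg hkv]
        have hAeq : A' (kk : Int) = A (kk : Int) := hA'other _ hkv'
        by_cases hc : (kk : Int) ≠ 0 ∧ A (kk : Int) = true
        · rw [if_pos hc, if_pos ⟨hc.1, by rw [hAeq]; exact hc.2⟩]
        · rw [if_neg hc, if_neg (by rw [hAeq]; exact hc)]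
  have hnoop : (A (pi v0) = true → A v0 = true) → pvAsg n pi A' st := by
    intro himp
    have hsame : A' v0 = A v0 := by
      rw [hA'v0]
      cases hApi : A (pi v0)
      · simp
      · rw [himp hApi]; simp
    have hAeq : ∀ w : Int, A' w = A w := by
      intro w
      by_cases hwv : w = v0
      · rw [hwv, hsame]
      · exact hA'other w hwv
    refine ⟨hlen, ?_, hA'0, hA'close, ?_⟩
    · intro w hw0 hwn
      rw [hget w hw0 hwn, hAeq w]
    · rw [hpar]
      apply List.map_congr_left
      intro kk _
      rw [hAeq (kk : Int)]
  have hge0 : PySem.List.pyGetD e 0 0 = e.getD 0 0 := PySem.List.pyGetD_zero e 0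
  have hge1 : PySem.List.pyGetD e 1 0 = e.getD 1 0 := by
    rw [show (1 : Int) = ((1 : Nat) : Int) from rfl, PySem.List.pyGetD_natCast]
  show pvAsg n pi A' (relaxEdgeB st e)
  simp only [relaxEdgeB]
  rw [hge0, hge1]
  rcases hconn with ⟨hea, heb⟩ | ⟨hea, heb⟩
  · rw [hea, heb, hget v0 (by omega) hvn, hget (pi v0) hp.1 hp.2]
    cases hAv : A v0 <;> cases hApi : A (pi v0)
    · simp only [hAv, hApi, Bool.false_and, Bool.not_false, Bool.true_and, Bool.and_true,
        if_neg (by simp : ¬ (false = true)), if_neg Bool.false_ne_true]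
      exact hnoop (fun h => by rw [hApi] at h; cases h)
    · simp only [hAv, hApi, Bool.false_and, Bool.not_false, Bool.true_and, Bool.and_true]
      rw [if_pos trivial]
      exact hassign hApi
    · exact absurd (hclose v0 hv1 hvn hAv) (by simp [hApi])
    · simp only [hAv, hApi, Bool.not_true, Bool.and_false, Bool.true_and]
      rw [if_neg (by simp), if_neg (by simp)]
      exact hnoop (fun _ => hAv)
  · rw [hea, heb, hget v0 (by omega) hvn, hget (pi v0) hp.1 hp.2]
    cases hAv : A v0 <;> cases hApi : A (pi v0)
    · simp only [hAv, hApi, Bool.false_and, Bool.and_false]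
      rw [if_neg (by simp), if_neg (by simp)]
      exact hnoop (fun h => by rw [hApi] at h; cases h)
    · simp only [hAv, hApi, Bool.not_false, Bool.true_and, Bool.and_true]
      rw [if_pos trivial]
      exact hassign hApi
    · exact absurd (hclose v0 hv1 hvn hAv) (by simp [hApi])
    · simp only [hAv, hApi, Bool.not_true, Bool.and_false, Bool.true_and]
      rw [if_neg (by simp), if_neg (by simp)]
      exact hnoop (fun _ => hAv)

theorem pv_relax_fold (n : Int) (adj : List (List Int)) (pi : Int → Int) (rk : Int → Nat)
    (tf : PvTF n adj pi rk) :
    ∀ (es : List (List Int)) (st : List Bool × List Int) (A : Int → Bool),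
      (∀ e ∈ es, ∃ v, (1 ≤ v ∧ v < n) ∧ pvConn e v (pi v)) → pvAsg n pi A st →
      ∃ A', pvAsg n pi A' (es.foldl relaxEdgeB st)
        ∧ (∀ w, A w = true → A' w = true)
        ∧ (∀ v, 1 ≤ v → v < n → (∃ e ∈ es, pvConn e v (pi v)) →
            A (pi v) = true → A' v = true) := by
  intro es
  induction es with
  | nil =>
    intro st A _ hinv
    exact ⟨A, hinv, fun _ h => h, fun v _ _ he _ => by
      obtain ⟨e, he', _⟩ := he
      exact absurd he' (List.not_mem_nil)⟩
  | cons e rest ih =>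
    intro st A hes hinv
    obtain ⟨v0, hv0, hc0⟩ := hes e (by simp)
    have hstep := pv_relax_step n adj pi rk tf e v0 hv0.1 hv0.2 hc0 st A hinv
    obtain ⟨A', hinv', hmono, hedge⟩ := ih (relaxEdgeB st e)
      (fun w => if w = v0 then (A v0 || A (pi v0)) else A w)
      (fun e' he' => hes e' (by simp [he'])) hstep
    have hmono1 : ∀ w, A w = true →
        (if w = v0 then (A v0 || A (pi v0)) else A w) = true := by
      intro w hw
      by_cases hwv : w = v0
      · rw [if_pos hwv, ← hwv, hw]
        simp
      · rw [if_neg hwv]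
        exact hw
    rw [List.foldl_cons]
    refine ⟨A', hinv', fun w hw => hmono w (hmono1 w hw), ?_⟩
    rintro v h1 h2 ⟨e', he', hce'⟩ hApi
    rcases List.mem_cons.mp he' with he'' | he''
    · subst he''
      have hvv0 : v = v0 := by
        rcases hce' with ⟨ha, hb⟩ | ⟨ha, hb⟩ <;> rcases hc0 with ⟨ha0, hb0⟩ | ⟨ha0, hb0⟩
        · exact ha.symm.trans ha0
        · exfalso
          have h1' : v = pi v0 := ha.symm.trans ha0
          have h2' : pi v = v0 := hb.symm.trans hb0
          have ra := tf.hrk v h1 h2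
          have rb := tf.hrk v0 hv0.1 hv0.2
          rw [h2'] at ra
          rw [← h1'] at rb
          omega
        · exfalso
          have h1' : pi v = v0 := ha.symm.trans ha0
          have h2' : v = pi v0 := hb.symm.trans hb0
          have ra := tf.hrk v h1 h2
          have rb := tf.hrk v0 hv0.1 hv0.2
          rw [h1'] at ra
          rw [← h2'] at rb
          omega
        · exact hb.symm.trans hb0
      subst hvv0
      refine hmono v ?_
      rw [if_pos rfl, hApi]
      simp
    · exact hedge v h1 h2 ⟨e', he'', hce'⟩ (hmono1 _ hApi)

theorem pv_relax_rounds (n : Int) (adj : List (List Int)) (pi : Int → Int) (rk : Int → Nat)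
    (tf : PvTF n adj pi rk) (edges : List (List Int))
    (hall : ∀ e ∈ edges, ∃ v, (1 ≤ v ∧ v < n) ∧ pvConn e v (pi v))
    (hcov : ∀ v : Int, 1 ≤ v → v < n → ∃ e ∈ edges, pvConn e v (pi v)) :
    ∀ (L : List Int) (k : Nat) (st : List Bool × List Int) (A : Int → Bool),
      pvAsg n pi A st → (∀ v : Int, 0 ≤ v → v < n → n.toNat ≤ k + rk v → A v = true) →
      ∃ A', pvAsg n pi A' (L.foldl (fun st _ => edges.foldl relaxEdgeB st) st)
        ∧ (∀ v : Int, 0 ≤ v → v < n → n.toNat ≤ (k + L.length) + rk v → A' v = true) := by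
  intro L
  induction L with
  | nil =>
    intro k st A hinv hlev
    exact ⟨A, hinv, fun v hv0 hvn hb => hlev v hv0 hvn (by simpa using hb)⟩
  | cons x L ih =>
    intro k st A hinv hlev
    obtain ⟨A1, hinv1, hmono1, hedge1⟩ := pv_relax_fold n adj pi rk tf edges st A hall hinv
    have hA10 : A1 0 = true := hmono1 0 hinv.2.2.1
    have hlev1 : ∀ v : Int, 0 ≤ v → v < n → n.toNat ≤ (k+1) + rk v → A1 v = true := by
      intro v hv0 hvn hb
      by_cases hz : v = 0
      · subst hz
        exact hA10
      · have hr := tf.hrange v (by omega) hvn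
        have hrkv := tf.hrk v (by omega) hvn
        have hApi : A (pi v) = true := hlev (pi v) hr.1 hr.2 (by omega)
        exact hedge1 v (by omega) hvn (hcov v (by omega) hvn) hApi
    obtain ⟨A', hinv', hfin⟩ := ih (k+1) (edges.foldl relaxEdgeB st) A1 hinv1 hlev1
    rw [List.foldl_cons]
    refine ⟨A', hinv', ?_⟩
    intro v hv0 hvn hb
    refine hfin v hv0 hvn ?_
    simp only [List.length_cons] at hb
    omega

theorem pv_relaxation (n : Int) (adj : List (List Int)) (pi : Int → Int) (rk : Int → Nat)
    (tf : PvTF n adj pi rk) (edges : List (List Int))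
    (hall : ∀ e ∈ edges, ∃ v, (1 ≤ v ∧ v < n) ∧ pvConn e v (pi v))
    (hcov : ∀ v : Int, 1 ≤ v → v < n → ∃ e ∈ edges, pvConn e v (pi v)) :
    ∃ asg, (PySem.List.pyRange 0 n 1).foldl (fun st _ => edges.foldl relaxEdgeB st)
        (PySem.List.pySetD (List.replicate n.toNat false) 0 true,
         List.replicate n.toNat (-1 : Int))
      = (asg, pvParArr n pi) := by
  have hn2 := tf.hn2
  have hcast : ((n.toNat : Nat) : Int) = n := Int.toNat_of_nonneg (by omega)
  have hlenL : (PySem.List.pyRange 0 n 1).length = n.toNat := by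
    rw [PySem.List.length_pyRange_one]
    simp
  have hinit : pvAsg n pi (fun w => decide (w = 0))
      (PySem.List.pySetD (List.replicate n.toNat false) 0 true,
       List.replicate n.toNat (-1 : Int)) := by
    refine ⟨by simp [PySem.List.length_pySetD], ?_, by simp, ?_, ?_⟩
    · intro w hw0 hwn
      show PySem.List.pyGetD (PySem.List.pySetD (List.replicate n.toNat false) 0 true) w false
        = decide (w = 0)
      rw [pv_getD_setD _ 0 w true false le_rfl hw0]
      by_cases hz : w = 0
      · rw [if_pos ⟨hz, by simp; omega⟩, hz]
        simp
      · rw [if_neg (by tauto), pv_getD_replicate _ _ _ _ hw0]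
        simp [hz]
    · intro w h1 _ hw
      simp only [decide_eq_true_eq] at hw
      omega
    · show List.replicate n.toNat (-1 : Int) = _
      symm
      rw [List.eq_replicate_iff]
      refine ⟨by simp, ?_⟩
      intro b hb
      simp only [List.mem_map, List.mem_range] at hb
      obtain ⟨w, _, hw⟩ := hb
      rw [← hw, if_neg (by rintro ⟨h1, h2⟩; simp only [decide_eq_true_eq] at h2; exact h1 h2)]
  obtain ⟨A', hinv', hall'⟩ := pv_relax_rounds n adj pi rk tf edges hall hcov
    (PySem.List.pyRange 0 n 1) 0 _ _ hinit
    (fun v hv0 hvn hb => by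
      by_cases hz : v = 0
      · simp [hz]
      · exact absurd (tf.hrkb v (by omega) hvn) (by omega))
  have hfinal : ∀ v : Int, 0 ≤ v → v < n → A' v = true := by
    intro v hv0 hvn
    exact hall' v hv0 hvn (by rw [hlenL]; omega)
  have h2 : ((PySem.List.pyRange 0 n 1).foldl (fun st _ => edges.foldl relaxEdgeB st)
      (PySem.List.pySetD (List.replicate n.toNat false) 0 true,
       List.replicate n.toNat (-1 : Int))).2 = pvParArr n pi := by
    rw [hinv'.2.2.2.2]
    unfold pvParArr
    apply List.map_congr_left
    intro a ha
    rw [List.mem_range] at ha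
    by_cases hz : (a : Int) = 0
    · rw [if_neg (by tauto), if_pos hz]
    · rw [if_pos ⟨hz, hfinal (a : Int) (by positivity) (by omega)⟩, if_neg hz]
  exact ⟨_, by rw [← h2]⟩

-- ---- port B, phase 2: ancestor climbing computes the subtree counts ----

def pvMOK (n : Int) (M : List (List Int)) : Prop :=
  M.length = n.toNat ∧
  ∀ w : Int, 0 ≤ w → w < n → ((PySem.List.pyGetD M w []).length : Int) = 21

theorem pv_climb (n : Int) (adj : List (List Int)) (pi : Int → Int) (rk : Int → Nat)
    (tf : PvTF n adj pi rk) (g : Int) (hg0 : 0 ≤ g) (hg21 : g < 21) :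
    ∀ (d : Nat) (v : Int), 0 ≤ v → v < n → (v ≠ 0 → n.toNat ≤ d + rk v) →
    ∀ (F : Nat) (M : List (List Int)), d ≤ F → pvMOK n M →
    pvMOK n (climbB (pvParArr n pi) g F v M)
    ∧ ∀ a h : Int, 0 ≤ a → 0 ≤ h →
        pvG2 (climbB (pvParArr n pi) g F v M) a h
          = pvG2 M a h
            + (if 1 ≤ a ∧ pvAnc n pi n.toNat a v = true ∧ h = g then 1 else 0) := by
  have hn2 := tf.hn2
  have hzero : ∀ (F : Nat) (M : List (List Int)), pvMOK n M →
      pvMOK n (climbB (pvParArr n pi) g F 0 M)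
      ∧ ∀ a h : Int, 0 ≤ a → 0 ≤ h →
          pvG2 (climbB (pvParArr n pi) g F 0 M) a h
            = pvG2 M a h
              + (if 1 ≤ a ∧ pvAnc n pi n.toNat a 0 = true ∧ h = g then 1 else 0) := by
    intro F M hM
    have hid : climbB (pvParArr n pi) g F 0 M = M := by
      cases F with
      | zero => rfl
      | succ f => simp [climbB]
    rw [hid]
    refine ⟨hM, ?_⟩
    intro a h ha0 hh0
    rw [pv_anc_zero,
      if_neg (by rintro ⟨h1, h2, _⟩; have := beq_iff_eq.mp h2; omega)]
    ring
  intro d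
  induction d with
  | zero =>
    intro v hv0 hvn hb F M hF hM
    have hvz : v = 0 := by
      by_contra hc
      exact absurd (tf.hrkb v (by omega) hvn) (by have := hb hc; omega)
    subst hvz
    exact hzero F M hM
  | succ d ih =>
    intro v hv0 hvn hb F M hF hM
    by_cases hvz : v = 0
    · subst hvz
      exact hzero F M hM
    · have h1v : 1 ≤ v := by omega
      have hr := tf.hrange v h1v hvn
      have hrkv := tf.hrk v h1v hvn
      obtain ⟨F', rfl⟩ : ∃ F', F = F' + 1 := ⟨F - 1, by omega⟩
      have hstep : climbB (pvParArr n pi) g (F' + 1) v M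
          = climbB (pvParArr n pi) g F' (PySem.List.pyGetD (pvParArr n pi) v 0)
              (PySem.List.pySetD M v (PySem.List.pySetD (PySem.List.pyGetD M v []) g
                (PySem.List.pyGetD (PySem.List.pyGetD M v []) g 0 + 1))) := by
        simp [climbB, hvz]
      have hparv : PySem.List.pyGetD (pvParArr n pi) v 0 = pi v := by
        rw [pv_parr_get n pi v 0 (by omega) (by omega) hvn, if_neg hvz]
      have hvM : v < (M.length : Int) := by rw [hM.1]; omega
      have hrowM : g < ((PySem.List.pyGetD M v []).length : Int) := by
        rw [hM.2 v (by omega) hvn]; omega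
      have hM1OK : pvMOK n (PySem.List.pySetD M v
          (PySem.List.pySetD (PySem.List.pyGetD M v []) g
            (PySem.List.pyGetD (PySem.List.pyGetD M v []) g 0 + 1))) := by
        refine ⟨by rw [PySem.List.length_pySetD]; exact hM.1, ?_⟩
        intro w hw0 hwn
        rw [show (PySem.List.pyGetD (PySem.List.pySetD M v
            (PySem.List.pySetD (PySem.List.pyGetD M v []) g
              (PySem.List.pyGetD (PySem.List.pyGetD M v []) g 0 + 1))) w []).length
            = (PySem.List.pyGetD M w []).length from
          pv_rowlen_upd M v _ (by omega) w hw0 (PySem.List.length_pySetD _ _ _)]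
        exact hM.2 w hw0 hwn
      have hM1val : ∀ a h : Int, 0 ≤ a → 0 ≤ h →
          pvG2 (PySem.List.pySetD M v
            (PySem.List.pySetD (PySem.List.pyGetD M v []) g
              (PySem.List.pyGetD (PySem.List.pyGetD M v []) g 0 + 1))) a h
            = pvG2 M a h + (if a = v ∧ h = g then 1 else 0) := by
        intro a h ha0 hh0
        rw [pv_g2_upd M v g _ (by omega) hg0 hvM hrowM a h ha0 hh0]
        by_cases hav : a = v ∧ h = g
        · rw [if_pos hav, if_pos hav]
          show PySem.List.pyGetD (PySem.List.pyGetD M v []) g 0 + 1 = pvG2 M a h + 1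
          rw [hav.1, hav.2]
          rfl
        · rw [if_neg hav, if_neg hav]
          ring
      rcases ih (pi v) hr.1 hr.2 (fun _ => by omega) F' _ (by omega) hM1OK with ⟨hOK, hval⟩
      rw [hstep, hparv]
      refine ⟨hOK, ?_⟩
      intro a h ha0 hh0
      rw [hval a h ha0 hh0, hM1val a h ha0 hh0]
      by_cases hhg : h = g
      · by_cases hav : a = v
        · have hanc : pvAnc n pi n.toNat a (pi v) = false := by
            by_contra hc
            rw [Bool.not_eq_false] at hc
            rcases pv_anc_rank n adj pi rk tf a n.toNat (pi v) hr.1 hr.2 (by omega) hc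
              with hx | hx
            · exact pv_pi_ne_self n adj pi rk tf v (by omega) hvn (hx.trans hav)
            · rw [hav] at hx
              omega
          have e1 : (if a = v ∧ h = g then (1 : Int) else 0) = 1 := if_pos ⟨hav, hhg⟩
          have e2 : (if 1 ≤ a ∧ pvAnc n pi n.toNat a (pi v) = true ∧ h = g
              then (1 : Int) else 0) = 0 :=
            if_neg (by rintro ⟨_, hc, _⟩; rw [hanc] at hc; cases hc)
          have e3 : (if 1 ≤ a ∧ pvAnc n pi n.toNat a v = true ∧ h = g
              then (1 : Int) else 0) = 1 :=
            if_pos ⟨by omega, by rw [hav]; exact pv_anc_self n pi v n.toNat, hhg⟩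
          rw [e1, e2, e3]
          ring
        · have hancEq : pvAnc n pi n.toNat a v = pvAnc n pi n.toNat a (pi v) := by
            rw [pv_anc_step n adj pi rk tf a v h1v hvn,
              show (v == a) = false from by simp; exact fun hx => hav hx.symm,
              Bool.false_or]
          rw [hancEq, if_neg (by rintro ⟨hx, _⟩; exact hav hx)]
          ring
      · rw [if_neg (by rintro ⟨_, hx⟩; exact hhg hx),
          if_neg (by rintro ⟨_, _, hx⟩; exact hhg hx),
          if_neg (by rintro ⟨_, _, hx⟩; exact hhg hx)]
        ring

theorem pv_countsB (n : Int) (adj : List (List Int)) (pi : Int → Int) (rk : Int → Nat)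
    (tf : PvTF n adj pi rk) (group : List Int)
    (hgl : n ≤ (group.length : Int)) (hg : ∀ g ∈ group, 0 ≤ g ∧ g ≤ 20) :
    ∀ (L : List Int) (M : List (List Int)), (∀ w ∈ L, 0 ≤ w ∧ w < n) → pvMOK n M →
    pvMOK n (L.foldl (fun M w =>
        climbB (pvParArr n pi) (PySem.List.pyGetD group w 0) (n.toNat + 1) w M) M)
    ∧ ∀ a h : Int, 1 ≤ a → 0 ≤ h →
        pvG2 (L.foldl (fun M w =>
            climbB (pvParArr n pi) (PySem.List.pyGetD group w 0) (n.toNat + 1) w M) M) a h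
          = pvG2 M a h
            + (L.countP (fun w => pvAnc n pi n.toNat a w
                && (PySem.List.pyGetD group w 0 == h)) : Int) := by
  have hn2 := tf.hn2
  intro L
  induction L with
  | nil =>
    intro M hL hM
    exact ⟨hM, fun a h _ _ => by simp⟩
  | cons w L ih =>
    intro M hL hM
    have hw := hL w (by simp)
    have hgw_mem : PySem.List.pyGetD group w 0 ∈ group :=
      PySem.List.pyGetD_mem group 0 (by constructor <;> omega)
    have hgw := hg _ hgw_mem
    rw [List.foldl_cons]
    rcases pv_climb n adj pi rk tf (PySem.List.pyGetD group w 0) hgw.1 (by omega)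
      n.toNat w hw.1 hw.2 (fun _ => by omega) (n.toNat + 1) M (by omega) hM
      with ⟨hOK1, hval1⟩
    rcases ih _ (fun x hx => hL x (by simp [hx])) hOK1 with ⟨hOK, hval⟩
    refine ⟨hOK, ?_⟩
    intro a h ha1 hh0
    rw [hval a h ha1 hh0, hval1 a h (by omega) hh0, List.countP_cons]
    have hcond : (if 1 ≤ a ∧ pvAnc n pi n.toNat a w = true ∧ h = PySem.List.pyGetD group w 0
          then (1 : Int) else 0)
        = (if (pvAnc n pi n.toNat a w && (PySem.List.pyGetD group w 0 == h)) = true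
            then (1 : Int) else 0) := by
      by_cases hc : pvAnc n pi n.toNat a w = true ∧ PySem.List.pyGetD group w 0 = h
      · rw [if_pos ⟨ha1, hc.1, hc.2.symm⟩, if_pos (by rw [hc.1]; simp [hc.2])]
      · rw [if_neg (by rintro ⟨_, h2, h3⟩; exact hc ⟨h2, h3.symm⟩),
          if_neg (by simp only [Bool.and_eq_true, beq_iff_eq]; exact hc)]
    have hsplit : ((L.countP (fun w => pvAnc n pi n.toNat a w
          && (PySem.List.pyGetD group w 0 == h))
          + if (pvAnc n pi n.toNat a w && (PySem.List.pyGetD group w 0 == h)) = true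
            then 1 else 0 : Nat) : Int)
        = (L.countP (fun w => pvAnc n pi n.toNat a w
            && (PySem.List.pyGetD group w 0 == h)) : Int)
          + (if (pvAnc n pi n.toNat a w && (PySem.List.pyGetD group w 0 == h)) = true
              then (1 : Int) else 0) := by
      split_ifs <;> push_cast <;> ring
    rw [hsplit, hcond]
    ring

-- ---- port B, phase 3: the double sum ----

theorem pv_innerB (row gc : List Int) (S : Int → Int)
    (hS : ∀ g : Int, 0 ≤ S g) :
    ∀ (L : List Int), (∀ g ∈ L, 1 ≤ g ∧ g < 21) →
    (∀ g : Int, 1 ≤ g → g < 21 → PySem.List.pyGetD row g 0 = S g) →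
    ∀ t : Int, L.foldl (fun t g =>
        let s := PySem.List.pyGetD row g 0
        if s > 0 then t + s * (PySem.List.pyGetD gc g 0 - s) else t) t
      = t + (L.map (fun g => S g * (PySem.List.pyGetD gc g 0 - S g))).sum := by
  intro L
  induction L with
  | nil =>
    intro _ _ t
    simp
  | cons g L ih =>
    intro hL hrow t
    have hgr := hL g (by simp)
    have hs := hrow g hgr.1 hgr.2
    rw [List.foldl_cons, ih (fun x hx => hL x (by simp [hx])) hrow, List.map_cons,
      List.sum_cons]
    show (if PySem.List.pyGetD row g 0 > 0
        then t + PySem.List.pyGetD row g 0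
          * (PySem.List.pyGetD gc g 0 - PySem.List.pyGetD row g 0)
        else t) + _ = _
    rw [hs]
    by_cases hp : S g > 0
    · rw [if_pos hp]
      ring
    · rw [if_neg hp]
      have h0 : S g = 0 := by
        have := hS g
        omega
      rw [h0]
      ring

theorem pv_phase2B (n : Int) (adj : List (List Int)) (pi : Int → Int) (rk : Int → Nat)
    (tf : PvTF n adj pi rk) (group gc : List Int)
    (hgl : n ≤ (group.length : Int)) (hg : ∀ g ∈ group, 0 ≤ g ∧ g ≤ 20) :
    ((PySem.List.pyRange 1 n 1).foldl (fun t v =>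
      let row := PySem.List.pyGetD
        ((PySem.List.pyRange 0 n 1).foldl
          (fun M w => climbB (pvParArr n pi) (PySem.List.pyGetD group w 0) (n.toNat + 1) w M)
          (List.replicate n.toNat (List.replicate 21 (0 : Int)))) v []
      (PySem.List.pyRange 1 21 1).foldl (fun t g =>
        let s := PySem.List.pyGetD row g 0
        if s > 0 then t + s * (PySem.List.pyGetD gc g 0 - s) else t) t) 0)
    = pvTotal n pi group gc := by
  have hn2 := tf.hn2
  have hLmem : ∀ w ∈ PySem.List.pyRange 0 n 1, 0 ≤ w ∧ w < n := fun w hw => by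
    rw [PySem.List.mem_pyRange_one] at hw
    exact hw
  have hM0 : pvMOK n (List.replicate n.toNat (List.replicate 21 (0 : Int))) := by
    refine ⟨by simp, ?_⟩
    intro w hw0 hwn
    rw [pv_getD_replicate _ _ _ _ hw0, if_pos (by omega)]
    simp
  obtain ⟨hOKC, hvalC⟩ := pv_countsB n adj pi rk tf group hgl hg
    (PySem.List.pyRange 0 n 1) _ hLmem hM0
  set C := (PySem.List.pyRange 0 n 1).foldl
    (fun M w => climbB (pvParArr n pi) (PySem.List.pyGetD group w 0) (n.toNat + 1) w M)
    (List.replicate n.toNat (List.replicate 21 (0 : Int))) with hC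
  have hCrow : ∀ v : Int, 1 ≤ v → v < n → ∀ g : Int, 1 ≤ g → g < 21 →
      PySem.List.pyGetD (PySem.List.pyGetD C v []) g 0 = pvS n pi group v g := by
    intro v h1 h2 g hg1 hg2
    have hz : pvG2 (List.replicate n.toNat (List.replicate 21 (0 : Int))) v g = 0 := by
      unfold pvG2
      rw [pv_getD_replicate _ _ _ _ (by omega), if_pos (by omega),
        pv_getD_replicate _ _ _ _ (by omega), if_pos (by omega)]
    have hv := hvalC v g h1 (by omega)
    rw [hz, zero_add] at hv
    exact hv
  have houter : ∀ (L : List Int), (∀ v ∈ L, 1 ≤ v ∧ v < n) → ∀ t : Int,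
      L.foldl (fun t v =>
        let row := PySem.List.pyGetD C v []
        (PySem.List.pyRange 1 21 1).foldl (fun t g =>
          let s := PySem.List.pyGetD row g 0
          if s > 0 then t + s * (PySem.List.pyGetD gc g 0 - s) else t) t) t
      = t + (L.map (pvTerm n pi group gc)).sum := by
    intro L
    induction L with
    | nil =>
      intro _ t
      simp
    | cons v L ihL =>
      intro hL t
      have hv := hL v (by simp)
      rw [List.foldl_cons, ihL (fun x hx => hL x (by simp [hx])), List.map_cons,
        List.sum_cons]
      have hinner := pv_innerB (PySem.List.pyGetD C v []) gc (pvS n pi group v)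
        (pv_S_nonneg n pi group v) (PySem.List.pyRange 1 21 1)
        (fun g hgm => by rw [PySem.List.mem_pyRange_one] at hgm; omega)
        (fun g h1 h2 => hCrow v hv.1 hv.2 g h1 h2) t
      rw [hinner]
      unfold pvTerm
      ring
  rw [houter (PySem.List.pyRange 1 n 1)
    (fun v hv => by rw [PySem.List.mem_pyRange_one] at hv; exact hv) 0]
  unfold pvTotal
  ring

-- ===== VERDICT (by name: the statement is the Claim_ definition above) =====
theorem interactionCost_spec : Claim_equal_interactionCost := by
  intro n edges group _hdom hpre
  unfold Spec_interactionCost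
  rcases hpre with h1 | ⟨hn2, hsh, hgl, hg, hcert⟩
  · subst h1; rfl
  · have hne : ¬ n = 1 := by omega
    rcases hseq : pvPrune n n.toNat (pvEdgePairs edges) with _ | seq
    · rw [hseq] at hcert; simp [Option.any] at hcert
    · rw [hseq] at hcert; simp only [Option.any] at hcert
      obtain ⟨tf, hall, hcov⟩ := pv_cert_tf n edges seq hn2 hsh hcert
      rcases pv_dfs n _ (pvPi seq) (pvRk seq) tf with ⟨order, hd, hnd, hmem, hpos⟩
      obtain ⟨asg, hrel⟩ := pv_relaxation n _ (pvPi seq) (pvRk seq) tf edges hall hcov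
      show interactionCost n edges group = interactionCost_alt n edges group
      unfold interactionCost interactionCost_alt
      rw [if_neg hne, if_neg hne]
      simp only [hd, hrel]
      rw [pv_phase2A n _ (pvPi seq) (pvRk seq) group _ order tf hgl hg hnd hmem hpos,
          pv_phase2B n _ (pvPi seq) (pvRk seq) tf group _ hgl hg]
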